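-- pv_equiv track=rewrite | github.com/Mugamta/Boostcamp_AITech5_CV11 | 2024/07.20/박수영_백준_3184_양.py | solution
-- ===== SOURCE A (Python) =====
-- from collections import deque
--
-- def solution(r, c, backyard):
--     """
--     goal: 하나의 줄에 아침까지 살아있는 양과 늑대의 수를 출력
--     note:
--         - '.': 비어있음
--         - '#': 울타리
--         - 'o': 양
--         - 'v': 늑대
--         - 상/하/좌/우 이동이 가능
--     how:
--         - BFS, 시뮬레이션
--         - 같은 영역 내에 있는 양과 늑대의 수를 구한 뒤, 조건에 따라 살아남은 양과 늑대의 수를 갱신하면 됨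
--     """
--     # 초기 양, 늑대의 수 구하기
--     init_sheep, init_wolf = 0, 0
--     for row in backyard:
--         for e in row:
--             if e == "o": init_sheep += 1
--             elif e == "v": init_wolf += 1
--
--     # BFS 알고리즘 구현
--     visited = [[False] * c for _ in range(r)]
--     move = [(-1, 0), (1, 0), (0, -1), (0, 1)]
--
--     def bfs(_r, _c):
--         # 같은 영역 내에 있는 양과 늑대의 수
--         sheep, wolf = 0, 0
--
--         # 탐색을 위해 큐에 좌표를 저장 && 방문 처리
--         queue = deque([(_r, _c)])
--         visited[_r][_c] = True
--
--         # 양 또는 늑대라면, 수를 셈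
--         if backyard[_r][_c] == "o": sheep += 1
--         elif backyard[_r][_c] == "v": wolf += 1
--
--
--         # 탐색 시작
--         while queue:
--             _r, _c = queue.popleft()
--
--             for dr, dc in move:
--                 nr = _r + dr
--                 nc = _c + dc
--
--                 # 예외 1: 범위를 벗어나는 경우
--                 if nr < 0 or nr >= r or nc < 0 or nc >= c:
--                     continue
--
--                 # 예외 2: 울타리인 경우
--                 if backyard[nr][nc] == "#":
--                     continue
--
--                 # 예외 3: 이미 탐색한 위치인 경우
--                 if visited[nr][nc]:
--                     continue
--
--                 # 탐색을 위해 큐에 좌표를 저장 && 방문 처리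
--                 queue.append((nr, nc))
--                 visited[nr][nc] = True
--
--                 # 양 또는 늑대라면, 수를 셈
--                 if backyard[nr][nc] == "o": sheep += 1
--                 elif backyard[nr][nc] == "v": wolf += 1
--
--         return sheep, wolf
--
--     # BFS 수행
--     for _r in range(r):
--         for _c in range(c):
--             # 예외 1: 울타리 또는 비어있는 곳
--             if backyard[_r][_c] in ["#", "."]:
--                 continue
--
--             # 예외 2: 이미 탐색한 위치
--             if visited[_r][_c]:
--                 continue
--
--             # 같은 영역 내에 있는 양과 늑대의 수를 탐색
--             s, w = bfs(_r, _c)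
--
--             # 양과 늑대의 수를 비교
--             if w >= s: init_sheep -= s
--             else: init_wolf -= w
--
--     return init_sheep, init_wolf
-- ===== SOURCE B (Python) =====
-- def solution(r, c, backyard):
--     # Union-find (disjoint sets) over grid cells indexed i*c+j, union by size;
--     # then one tally pass per root and one subtraction pass over roots.
--     sheep = sum(row.count("o") for row in backyard)
--     wolf = sum(row.count("v") for row in backyard)
--     if r <= 0 or c <= 0:
--         # no grid to flood: nothing survives differently
--         return sheep, wolf
--
--     n = r * c
--     parent = list(range(n))
--     size = [1] * n
--
--     def find(x):
--         # union by size keeps trees shallow; no path compression needed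
--         while parent[x] != x:
--             x = parent[x]
--         return x
--
--     def union(a, b):
--         ra, rb = find(a), find(b)
--         if ra == rb:
--             return
--         if size[ra] < size[rb]:
--             ra, rb = rb, ra
--         parent[rb] = ra
--         size[ra] += size[rb]
--
--     for i in range(r):
--         for j in range(c):
--             if backyard[i][j] == "#":
--                 continue
--             if j + 1 < c and backyard[i][j + 1] != "#":
--                 union(i * c + j, i * c + j + 1)
--             if i + 1 < r and backyard[i + 1][j] != "#":
--                 union(i * c + j, (i + 1) * c + j)
--
--     o_cnt = [0] * n
--     v_cnt = [0] * n
--     for i in range(r):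
--         for j in range(c):
--             e = backyard[i][j]
--             if e == "o":
--                 o_cnt[find(i * c + j)] += 1
--             elif e == "v":
--                 v_cnt[find(i * c + j)] += 1
--
--     for k in range(n):
--         if find(k) == k:
--             s, w = o_cnt[k], v_cnt[k]
--             if w >= s:
--                 sheep -= s
--             else:
--                 wolf -= w
--     return sheep, wolf
-- ===== Notes on version B (the rewrite author's own statement) =====
-- stated objective: alternative
-- what changed: Replaces A's per-region BFS flood fill (deque, boolean visited matrix, counts gathered while traversing each region) by a disjoint-set union-find over cell indices i*c+j: one pass unions each non-'#' cell with its right and down non-'#' neighbours (union by size, iterative find), then a tally pass accumulates 'o'/'v' counts per root, and a final pass over roots applies the survival rule to the global totals.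
import Mathlib
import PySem

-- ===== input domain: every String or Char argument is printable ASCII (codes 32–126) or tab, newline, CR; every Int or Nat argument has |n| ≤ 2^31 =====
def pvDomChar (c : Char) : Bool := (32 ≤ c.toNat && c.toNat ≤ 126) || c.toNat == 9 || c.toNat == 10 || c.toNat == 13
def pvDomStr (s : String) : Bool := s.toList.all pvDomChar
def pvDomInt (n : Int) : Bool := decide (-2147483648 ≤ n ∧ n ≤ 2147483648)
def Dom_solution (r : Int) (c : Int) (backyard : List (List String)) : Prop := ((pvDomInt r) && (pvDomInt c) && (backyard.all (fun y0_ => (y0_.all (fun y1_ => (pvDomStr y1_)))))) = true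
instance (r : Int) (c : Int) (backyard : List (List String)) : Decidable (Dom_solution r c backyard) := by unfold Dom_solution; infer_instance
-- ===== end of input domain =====

-- B replaces A's per-region BFS flood fill (deque + boolean visited matrix) by a
-- disjoint-set union-find over cell indices i*c+j (union by size, iterative find):
-- one pass unions right/down non-'#' neighbours, one pass tallies 'o'/'v' per root,
-- one pass over roots applies the survival rule (objective: alternative, not faster).

-- ===== PORT A =====
-- backyard[i][j]; total via defaults, exact under Pre_solution (every used index is bounds-checked nonneg)
def pvA_cell (g : List (List String)) (i j : Int) : String :=
  PySem.List.pyGetD (PySem.List.pyGetD g i []) j ""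

def pvA_vget (V : List (List Bool)) (i j : Int) : Bool :=
  PySem.List.pyGetD (PySem.List.pyGetD V i []) j false

def pvA_vset (V : List (List Bool)) (i j : Int) : List (List Bool) :=
  PySem.List.pySetD V i (PySem.List.pySetD (PySem.List.pyGetD V i []) j true)

def pvA_initCount (backyard : List (List String)) : Int × Int :=
  backyard.foldl (fun acc row =>
    row.foldl (fun (p : Int × Int) e =>
      if e = "o" then (p.1 + 1, p.2) else if e = "v" then (p.1, p.2 + 1) else p) acc) (0, 0)

def pvA_move : List (Int × Int) := [(-1, 0), (1, 0), (0, -1), (0, 1)]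

-- one neighbour (dr, dc) of the popped cell u, state = (queue, visited, sheep, wolf)
def pvA_nbr (r c : Int) (g : List (List String)) (u : Int × Int)
    (st : List (Int × Int) × List (List Bool) × Int × Int) (d : Int × Int) :
    List (Int × Int) × List (List Bool) × Int × Int :=
  let nr := u.1 + d.1
  let nc := u.2 + d.2
  if nr < 0 ∨ r ≤ nr ∨ nc < 0 ∨ c ≤ nc then st
  else if pvA_cell g nr nc = "#" then st
  else if pvA_vget st.2.1 nr nc then st
  else
    let q := st.1 ++ [(nr, nc)]
    let V := pvA_vset st.2.1 nr nc
    if pvA_cell g nr nc = "o" then (q, V, st.2.2.1 + 1, st.2.2.2)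
    else if pvA_cell g nr nc = "v" then (q, V, st.2.2.1, st.2.2.2 + 1)
    else (q, V, st.2.2.1, st.2.2.2)

-- 'while queue:'; fuel only totalises the loop (2*r*c+1 always suffices, proved below)
def pvA_bfsLoop (r c : Int) (g : List (List String)) :
    Nat → List (Int × Int) × List (List Bool) × Int × Int → List (List Bool) × Int × Int
  | 0, st => (st.2.1, st.2.2.1, st.2.2.2)
  | fuel + 1, st =>
    match st.1 with
    | [] => (st.2.1, st.2.2.1, st.2.2.2)
    | u :: rest => pvA_bfsLoop r c g fuel (pvA_move.foldl (pvA_nbr r c g u) (rest, st.2.1, st.2.2.1, st.2.2.2))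

def pvA_bfs (r c : Int) (g : List (List String)) (V : List (List Bool)) (i j : Int) :
    List (List Bool) × Int × Int :=
  let V1 := pvA_vset V i j
  let sw : Int × Int :=
    if pvA_cell g i j = "o" then (1, 0) else if pvA_cell g i j = "v" then (0, 1) else (0, 0)
  pvA_bfsLoop r c g (2 * r.toNat * c.toNat + 1) ([(i, j)], V1, sw.1, sw.2)

def pvA_cellStep (r c : Int) (g : List (List String))
    (st : List (List Bool) × Int × Int) (i j : Int) : List (List Bool) × Int × Int :=
  if pvA_cell g i j ∈ (["#", "."] : List String) then st
  else if pvA_vget st.1 i j then st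
  else
    let res := pvA_bfs r c g st.1 i j
    if res.2.1 ≤ res.2.2 then (res.1, st.2.1 - res.2.1, st.2.2)
    else (res.1, st.2.1, st.2.2 - res.2.2)

def solution (r : Int) (c : Int) (backyard : List (List String)) : Int × Int :=
  let init := pvA_initCount backyard
  let V0 := List.replicate r.toNat (List.replicate c.toNat false)
  let fin := (PySem.List.pyRange 0 r 1).foldl
    (fun st i => (PySem.List.pyRange 0 c 1).foldl
      (fun st j => pvA_cellStep r c backyard st i j) st) (V0, init.1, init.2)
  (fin.2.1, fin.2.2)

-- ===== PORT B =====
-- backyard[i][j] read with a default; under Pre_solution every used index is in range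
def pvB_cell (g : List (List String)) (i j : Int) : String :=
  PySem.List.pyGetD (PySem.List.pyGetD g i []) j ""

-- 'while parent[x] != x: x = parent[x]'; fuel parent.length+1 always suffices (proved below)
def pvB_findF (par : List Int) : Nat → Int → Int
  | 0, x => x
  | f + 1, x =>
    let px := PySem.List.pyGetD par x 0
    if px = x then x else pvB_findF par f px

def pvB_find (par : List Int) (x : Int) : Int := pvB_findF par (par.length + 1) x

-- union by size; state = (parent, size)
def pvB_union (st : List Int × List Int) (a b : Int) : List Int × List Int :=
  let ra := pvB_find st.1 a
  let rb := pvB_find st.1 b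
  if ra = rb then st
  else
    let pr := if PySem.List.pyGetD st.2 ra 0 < PySem.List.pyGetD st.2 rb 0 then (rb, ra) else (ra, rb)
    (PySem.List.pySetD st.1 pr.2 pr.1,
     PySem.List.pySetD st.2 pr.1 (PySem.List.pyGetD st.2 pr.1 0 + PySem.List.pyGetD st.2 pr.2 0))

def pvB_unionCell (r c : Int) (g : List (List String))
    (st : List Int × List Int) (i j : Int) : List Int × List Int :=
  if pvB_cell g i j = "#" then st
  else
    let st1 := if j + 1 < c ∧ pvB_cell g i (j + 1) ≠ "#" then
      pvB_union st (i * c + j) (i * c + j + 1) else st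
    if i + 1 < r ∧ pvB_cell g (i + 1) j ≠ "#" then
      pvB_union st1 (i * c + j) ((i + 1) * c + j) else st1

def pvB_tallyCell (c : Int) (g : List (List String)) (par : List Int)
    (t : List Int × List Int) (i j : Int) : List Int × List Int :=
  if pvB_cell g i j = "o" then
    let k := pvB_find par (i * c + j)
    (PySem.List.pySetD t.1 k (PySem.List.pyGetD t.1 k 0 + 1), t.2)
  else if pvB_cell g i j = "v" then
    let k := pvB_find par (i * c + j)
    (t.1, PySem.List.pySetD t.2 k (PySem.List.pyGetD t.2 k 0 + 1))
  else t

def pvB_rootStep (par oArr vArr : List Int) (sw : Int × Int) (k : Int) : Int × Int :=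
  if pvB_find par k = k then
    let s := PySem.List.pyGetD oArr k 0
    let w := PySem.List.pyGetD vArr k 0
    if s ≤ w then (sw.1 - s, sw.2) else (sw.1, sw.2 - w)
  else sw

def solution_alt (r : Int) (c : Int) (backyard : List (List String)) : Int × Int :=
  let sheep : Int := (backyard.map (fun row => (PySem.List.count row "o" : Int))).sum
  let wolf : Int := (backyard.map (fun row => (PySem.List.count row "v" : Int))).sum
  if r ≤ 0 ∨ c ≤ 0 then (sheep, wolf)
  else
  let n := r * c
  let st := (PySem.List.pyRange 0 r 1).foldl
    (fun st i => (PySem.List.pyRange 0 c 1).foldl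
      (fun st j => pvB_unionCell r c backyard st i j) st)
    (PySem.List.pyRange 0 n 1, List.replicate n.toNat 1)
  let par := st.1
  let t := (PySem.List.pyRange 0 r 1).foldl
    (fun t i => (PySem.List.pyRange 0 c 1).foldl
      (fun t j => pvB_tallyCell c backyard par t i j) t)
    (List.replicate n.toNat 0, List.replicate n.toNat 0)
  (PySem.List.pyRange 0 n 1).foldl (pvB_rootStep par t.1 t.2) (sheep, wolf)

-- ===== PRECONDITION & SPEC =====
-- Pre_ excludes exactly the inputs where Python A raises IndexError: when both loop bounds are
-- positive, A reads backyard[i][j] for all 0 ≤ i < r, 0 ≤ j < c.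
def Pre_solution (r : Int) (c : Int) (backyard : List (List String)) : Prop :=
  0 < r → 0 < c →
    (r ≤ (backyard.length : Int) ∧ ∀ row ∈ backyard.take r.toNat, c ≤ (row.length : Int))
instance (r : Int) (c : Int) (backyard : List (List String)) : Decidable (Pre_solution r c backyard) := by
  unfold Pre_solution; infer_instance

def pvWitness_solution : Int × Int × List (List String) := (2, 2, [["o", "."], ["v", "#"]])

def Spec_solution (r : Int) (c : Int) (backyard : List (List String)) (out : Int × Int) : Prop :=
  out = solution_alt r c backyard
instance (r : Int) (c : Int) (backyard : List (List String)) (out : Int × Int) : Decidable (Spec_solution r c backyard out) := by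
  unfold Spec_solution; infer_instance

-- ===== CLAIM (what is proved, stated in full; the proofs are below) =====
def Claim_equal_solution : Prop := ∀ (r : Int) (c : Int) (backyard : List (List String)), Dom_solution r c backyard → Pre_solution r c backyard → Spec_solution r c backyard (solution r c backyard)

-- ===== LEMMAS AND PROOFS =====

-- graph notions shared by both proofs
def pvOk (r c : Int) (g : List (List String)) (p : Int × Int) : Prop :=
  0 ≤ p.1 ∧ p.1 < r ∧ 0 ≤ p.2 ∧ p.2 < c ∧ pvA_cell g p.1 p.2 ≠ "#"

def pvAdj (r c : Int) (g : List (List String)) (u v : Int × Int) : Prop :=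
  pvOk r c g v ∧ ∃ d ∈ pvA_move, v = (u.1 + d.1, u.2 + d.2)

def pvReach (r c : Int) (g : List (List String)) (s v : Int × Int) : Prop :=
  Relation.ReflTransGen (pvAdj r c g) s v

noncomputable def pvBox (r c : Int) : Finset (Int × Int) := Finset.Ico 0 r ×ˢ Finset.Ico 0 c

noncomputable def pvOCnt (g : List (List String)) (N : Finset (Int × Int)) : Int :=
  ((N.filter (fun p => pvA_cell g p.1 p.2 = "o")).card : Int)

noncomputable def pvVCnt (g : List (List String)) (N : Finset (Int × Int)) : Int :=
  ((N.filter (fun p => pvA_cell g p.1 p.2 = "v")).card : Int)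

def pvDims (r c : Int) (V : List (List Bool)) : Prop :=
  V.length = r.toNat ∧ ∀ row ∈ V, row.length = c.toNat

def pvVrep (r c : Int) (V : List (List Bool)) (S : Finset (Int × Int)) : Prop :=
  ∀ a b : Int, 0 ≤ a → a < r → 0 ≤ b → b < c → (pvA_vget V a b = true ↔ (a, b) ∈ S)

def pvClosed (r c : Int) (g : List (List String)) (S : Finset (Int × Int)) : Prop :=
  (∀ p ∈ S, pvOk r c g p) ∧ ∀ p ∈ S, ∀ v, pvAdj r c g p v → v ∈ S

def pvCloseQ (r c : Int) (g : List (List String)) (S N : Finset (Int × Int))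
    (Q : List (Int × Int)) : Prop :=
  ∀ p ∈ N, p ∉ Q → ∀ v, pvAdj r c g p v → v ∈ S ∪ N

noncomputable def pvMeas (r c : Int) (S N : Finset (Int × Int)) (Q : List (Int × Int)) : Nat :=
  Q.length + 2 * ((pvBox r c \ (S ∪ N)).card)

-- basic graph lemmas
theorem pvAdj_symm {r c : Int} {g : List (List String)} {u v : Int × Int}
    (hu : pvOk r c g u) (h : pvAdj r c g u v) : pvAdj r c g v u := by
  obtain ⟨hv, d, hd, hvd⟩ := h
  refine ⟨hu, (-d.1, -d.2), ?_, ?_⟩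
  · simp only [pvA_move, List.mem_cons, List.not_mem_nil, or_false] at hd ⊢
    rcases hd with h | h | h | h <;> subst h <;> norm_num
  · subst hvd; cases u; simp

theorem pvReach_ok {r c : Int} {g : List (List String)} {s v : Int × Int}
    (hok : pvOk r c g s) (h : pvReach r c g s v) : pvOk r c g v := by
  induction h with
  | refl => exact hok
  | tail _ hadj _ => exact hadj.1

theorem pvReach_not_mem {r c : Int} {g : List (List String)} {S : Finset (Int × Int)}
    {s v : Int × Int} (hS : pvClosed r c g S) (hs : s ∉ S) (hok : pvOk r c g s)
    (h : pvReach r c g s v) : v ∉ S := by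
  induction h with
  | refl => exact hs
  | @tail u w hru hadj ih =>
    intro hwS
    exact ih (hS.2 _ hwS _ (pvAdj_symm (pvReach_ok hok hru) hadj))

-- matrix lemmas
theorem pvSetD_inrange {α : Type} (xs : List α) (i : Int) (v : α)
    (h0 : 0 ≤ i) (h1 : i < (xs.length : Int)) :
    PySem.List.pySetD xs i v = xs.set i.toNat v := by
  simp [PySem.List.pySetD, PySem.List.pySet?, PySem.List.pyIdx?, h0, h1]

theorem pvGetD_inrange {α : Type} (xs : List α) (i : Int) (d : α)
    (h0 : 0 ≤ i) (h1 : i < (xs.length : Int)) :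
    PySem.List.pyGetD xs i d = xs[i.toNat]'(by omega) :=
  PySem.List.pyGetD_eq_getElem xs d h0 h1

theorem pvDims_vset {r c : Int} {V : List (List Bool)} {i j : Int}
    (hd : pvDims r c V) (hi0 : 0 ≤ i) (hir : i < r) (hj0 : 0 ≤ j) (hjc : j < c) :
    pvDims r c (pvA_vset V i j) := by
  obtain ⟨hlen, hrow⟩ := hd
  have h1 : i < (V.length : Int) := by rw [hlen]; omega
  have hi' : i.toNat < V.length := by omega
  have hr0 : V[i.toNat] ∈ V := List.getElem_mem hi'
  have hrl : (V[i.toNat]).length = c.toNat := hrow _ hr0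
  have h2 : j < ((PySem.List.pyGetD V i []).length : Int) := by
    rw [pvGetD_inrange V i [] hi0 h1, hrl]; omega
  unfold pvA_vset
  rw [pvSetD_inrange _ j true hj0 h2, pvGetD_inrange V i [] hi0 h1,
    pvSetD_inrange V i _ hi0 h1]
  refine ⟨by simpa using hlen, ?_⟩
  intro row hmem
  rcases List.mem_or_eq_of_mem_set hmem with h | h
  · exact hrow _ h
  · subst h; simpa using hrl

theorem pvVget_vset {r c : Int} {V : List (List Bool)} {i j a b : Int}
    (hd : pvDims r c V) (hi0 : 0 ≤ i) (hir : i < r) (hj0 : 0 ≤ j) (hjc : j < c)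
    (ha0 : 0 ≤ a) (har : a < r) (hb0 : 0 ≤ b) (hbc : b < c) :
    pvA_vget (pvA_vset V i j) a b = if a = i ∧ b = j then true else pvA_vget V a b := by
  obtain ⟨hlen, hrow⟩ := hd
  have h1 : i < (V.length : Int) := by rw [hlen]; omega
  have hi' : i.toNat < V.length := by omega
  have ha' : a.toNat < V.length := by omega
  have hrl : (V[i.toNat]).length = c.toNat := hrow _ (List.getElem_mem hi')
  have hal : (V[a.toNat]).length = c.toNat := hrow _ (List.getElem_mem ha')
  have h2 : j < ((PySem.List.pyGetD V i []).length : Int) := by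
    rw [pvGetD_inrange V i [] hi0 h1, hrl]; omega
  unfold pvA_vset pvA_vget
  rw [pvSetD_inrange _ j true hj0 h2, pvGetD_inrange V i [] hi0 h1,
    pvSetD_inrange V i _ hi0 h1]
  have hsl : a < ((V.set i.toNat (V[i.toNat].set j.toNat true)).length : Int) := by
    simpa using (by omega : a < (V.length : Int))
  rw [pvGetD_inrange _ a _ ha0 hsl]
  by_cases hai : a = i
  · subst hai
    rw [List.getElem_set_self]
    have hb1 : b < (((V[a.toNat].set j.toNat true)).length : Int) := by
      simp [hrl]; omega
    rw [pvGetD_inrange _ b false hb0 hb1]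
    have hb2 : b < ((V[a.toNat]).length : Int) := by rw [hrl]; omega
    by_cases hbj : b = j
    · subst hbj
      rw [List.getElem_set_self (by omega)]
      simp
    · have : j.toNat ≠ b.toNat := by omega
      rw [List.getElem_set_ne this]
      rw [pvGetD_inrange V a [] ha0 h1, pvGetD_inrange _ b false hb0 hb2]
      simp [hbj]
  · have : i.toNat ≠ a.toNat := by omega
    rw [List.getElem_set_ne this]
    have hb2 : b < ((V[a.toNat]).length : Int) := by rw [hal]; omega
    rw [pvGetD_inrange _ b false hb0 hb2,
      pvGetD_inrange V a [] ha0 (by omega : a < (V.length : Int)),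
      pvGetD_inrange _ b false hb0 hb2]
    simp [hai]

theorem pvVrep_vset {r c : Int} {V : List (List Bool)} {S : Finset (Int × Int)} {i j : Int}
    (hd : pvDims r c V) (hrep : pvVrep r c V S)
    (hi0 : 0 ≤ i) (hir : i < r) (hj0 : 0 ≤ j) (hjc : j < c) :
    pvVrep r c (pvA_vset V i j) (insert (i, j) S) := by
  intro a b ha0 har hb0 hbc
  rw [pvVget_vset hd hi0 hir hj0 hjc ha0 har hb0 hbc]
  by_cases h : a = i ∧ b = j
  · simp [h.1, h.2]
  · have : ((a, b) : Int × Int) ≠ (i, j) := by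
      intro he; cases he; exact h ⟨rfl, rfl⟩
    simp [h, this, hrep a b ha0 har hb0 hbc]

theorem pvVget_init {r c : Int} {a b : Int}
    (ha0 : 0 ≤ a) (har : a < r) (hb0 : 0 ≤ b) (hbc : b < c) :
    pvA_vget (List.replicate r.toNat (List.replicate c.toNat false)) a b = false := by
  unfold pvA_vget
  have h1 : a < ((List.replicate r.toNat (List.replicate c.toNat false)).length : Int) := by
    simp; omega
  rw [pvGetD_inrange _ a _ ha0 h1, List.getElem_replicate]
  have h2 : b < ((List.replicate c.toNat (false : Bool)).length : Int) := by simp; omega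
  rw [pvGetD_inrange _ b false hb0 h2, List.getElem_replicate]

-- counting lemmas
theorem pvOCnt_insert {g : List (List String)} {N : Finset (Int × Int)} {v : Int × Int}
    (hv : v ∉ N) :
    pvOCnt g (insert v N) = pvOCnt g N + (if pvA_cell g v.1 v.2 = "o" then 1 else 0) := by
  unfold pvOCnt
  rw [Finset.filter_insert]
  split_ifs with h
  · rw [Finset.card_insert_of_notMem (by simp [hv])]; push_cast; ring
  · simp

theorem pvVCnt_insert {g : List (List String)} {N : Finset (Int × Int)} {v : Int × Int}
    (hv : v ∉ N) :
    pvVCnt g (insert v N) = pvVCnt g N + (if pvA_cell g v.1 v.2 = "v" then 1 else 0) := by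
  unfold pvVCnt
  rw [Finset.filter_insert]
  split_ifs with h
  · rw [Finset.card_insert_of_notMem (by simp [hv])]; push_cast; ring
  · simp

theorem pvOCnt_singleton (g : List (List String)) (v : Int × Int) :
    pvOCnt g {v} = (if pvA_cell g v.1 v.2 = "o" then 1 else 0) := by
  unfold pvOCnt
  rw [Finset.filter_singleton]
  split_ifs <;> simp

theorem pvVCnt_singleton (g : List (List String)) (v : Int × Int) :
    pvVCnt g {v} = (if pvA_cell g v.1 v.2 = "v" then 1 else 0) := by
  unfold pvVCnt
  rw [Finset.filter_singleton]
  split_ifs <;> simp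

-- ===== invariant for A's BFS loop =====
structure pvInvA (r c : Int) (g : List (List String)) (S : Finset (Int × Int))
    (s0 w0 : Int) (t : Int × Int) (Q : List (Int × Int)) (V : List (List Bool))
    (sc wc : Int) (N : Finset (Int × Int)) : Prop where
  dims : pvDims r c V
  rep : pvVrep r c V (S ∪ N)
  qmem : ∀ q ∈ Q, q ∈ N
  qnodup : Q.Nodup
  nok : ∀ p ∈ N, pvOk r c g p
  nreach : ∀ p ∈ N, pvReach r c g t p
  ndisj : ∀ p ∈ N, p ∉ S
  scnt : sc = s0 + pvOCnt g N
  wcnt : wc = w0 + pvVCnt g N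

theorem pvA_nbr_spec {r c : Int} {g : List (List String)} {S : Finset (Int × Int)}
    {s0 w0 : Int} {t u d : Int × Int} {Q : List (Int × Int)} {V : List (List Bool)}
    {sc wc : Int} {N : Finset (Int × Int)}
    (hd : d ∈ pvA_move) (hu : u ∈ N)
    (hInv : pvInvA r c g S s0 w0 t Q V sc wc N)
    (hcl : pvCloseQ r c g S N (u :: Q)) :
    ∃ N' Q' V' sc' wc', pvA_nbr r c g u (Q, V, sc, wc) d = (Q', V', sc', wc') ∧
      N ⊆ N' ∧ pvInvA r c g S s0 w0 t Q' V' sc' wc' N' ∧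
      pvCloseQ r c g S N' (u :: Q') ∧
      (pvOk r c g (u.1 + d.1, u.2 + d.2) → (u.1 + d.1, u.2 + d.2) ∈ S ∪ N') ∧
      pvMeas r c S N' Q' ≤ pvMeas r c S N Q := by
  obtain ⟨hdims, hrep, hqmem, hqnodup, hnok, hnreach, hndisj, hscnt, hwcnt⟩ := hInv
  by_cases hb : (u.1 + d.1 < 0 ∨ r ≤ u.1 + d.1 ∨ u.2 + d.2 < 0 ∨ c ≤ u.2 + d.2)
  · exact ⟨N, Q, V, sc, wc, by simp [pvA_nbr, hb], Finset.Subset.refl _,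
      ⟨hdims, hrep, hqmem, hqnodup, hnok, hnreach, hndisj, hscnt, hwcnt⟩, hcl,
      fun hok => absurd hb (by obtain ⟨a1, a2, a3, a4, _⟩ := hok; omega),
      le_refl _⟩
  have hb1 : 0 ≤ u.1 + d.1 := by omega
  have hb2 : u.1 + d.1 < r := by omega
  have hb3 : 0 ≤ u.2 + d.2 := by omega
  have hb4 : u.2 + d.2 < c := by omega
  by_cases hsharp : pvA_cell g (u.1 + d.1) (u.2 + d.2) = "#"
  · exact ⟨N, Q, V, sc, wc, by simp [pvA_nbr, hb, hsharp], Finset.Subset.refl _,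
      ⟨hdims, hrep, hqmem, hqnodup, hnok, hnreach, hndisj, hscnt, hwcnt⟩, hcl,
      fun hok => absurd hsharp hok.2.2.2.2, le_refl _⟩
  by_cases hvis : pvA_vget V (u.1 + d.1) (u.2 + d.2) = true
  · refine ⟨N, Q, V, sc, wc, by simp [pvA_nbr, hb, hsharp, hvis], Finset.Subset.refl _,
      ⟨hdims, hrep, hqmem, hqnodup, hnok, hnreach, hndisj, hscnt, hwcnt⟩, hcl,
      fun _ => (hrep _ _ hb1 hb2 hb3 hb4).mp hvis, le_refl _⟩
  -- push case
  have hvnot : ((u.1 + d.1, u.2 + d.2) : Int × Int) ∉ S ∪ N := by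
    intro hmem
    exact hvis ((hrep _ _ hb1 hb2 hb3 hb4).mpr hmem)
  have hvok : pvOk r c g (u.1 + d.1, u.2 + d.2) := ⟨hb1, hb2, hb3, hb4, hsharp⟩
  have hadj : pvAdj r c g u (u.1 + d.1, u.2 + d.2) := ⟨hvok, d, hd, rfl⟩
  have hvnotN : ((u.1 + d.1, u.2 + d.2) : Int × Int) ∉ N :=
    fun h => hvnot (Finset.mem_union_right _ h)
  have hvnotQ : ((u.1 + d.1, u.2 + d.2) : Int × Int) ∉ Q :=
    fun h => hvnotN (hqmem _ h)
  have hunion : S ∪ insert (u.1 + d.1, u.2 + d.2) N = insert (u.1 + d.1, u.2 + d.2) (S ∪ N) :=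
    Finset.union_insert _ _ _
  have hsub : N ⊆ insert (u.1 + d.1, u.2 + d.2) N := Finset.subset_insert _ _
  have hInv' : ∀ sc' wc',
      sc' = s0 + pvOCnt g (insert (u.1 + d.1, u.2 + d.2) N) →
      wc' = w0 + pvVCnt g (insert (u.1 + d.1, u.2 + d.2) N) →
      pvInvA r c g S s0 w0 t (Q ++ [(u.1 + d.1, u.2 + d.2)])
        (pvA_vset V (u.1 + d.1) (u.2 + d.2)) sc' wc'
        (insert (u.1 + d.1, u.2 + d.2) N) := by
    intro sc' wc' hs hw
    refine ⟨pvDims_vset hdims hb1 hb2 hb3 hb4, ?_, ?_, ?_, ?_, ?_, ?_, hs, hw⟩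
    · rw [hunion]
      exact pvVrep_vset hdims hrep hb1 hb2 hb3 hb4
    · intro q hq
      rcases List.mem_append.mp hq with h | h
      · exact hsub (hqmem _ h)
      · simp at h; subst h; exact Finset.mem_insert_self _ _
    · rw [List.nodup_append]
      refine ⟨hqnodup, List.nodup_singleton _, ?_⟩
      intro x hx y hy
      rw [List.mem_singleton] at hy
      subst hy
      intro he
      subst he
      exact hvnotQ hx
    · intro p hp
      rcases Finset.mem_insert.mp hp with h | h
      · subst h; exact hvok
      · exact hnok _ h
    · intro p hp
      rcases Finset.mem_insert.mp hp with h | h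
      · subst h; exact Relation.ReflTransGen.tail (hnreach u hu) hadj
      · exact hnreach _ h
    · intro p hp
      rcases Finset.mem_insert.mp hp with h | h
      · subst h; exact fun hS => hvnot (Finset.mem_union_left _ hS)
      · exact hndisj _ h
  have hcl' : pvCloseQ r c g S (insert (u.1 + d.1, u.2 + d.2) N)
      (u :: (Q ++ [(u.1 + d.1, u.2 + d.2)])) := by
    intro p hp hpQ v' hadj'
    rcases Finset.mem_insert.mp hp with h | h
    · exact absurd (by simp [h] : p ∈ u :: (Q ++ [(u.1 + d.1, u.2 + d.2)])) hpQ
    · refine Finset.union_subset_union_right hsub ?_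
      exact hcl p h (fun hm => hpQ (by rcases List.mem_cons.mp hm with h' | h' <;>
        simp [h', List.mem_append])) v' hadj'
  have hmeas : pvMeas r c S (insert (u.1 + d.1, u.2 + d.2) N)
      (Q ++ [(u.1 + d.1, u.2 + d.2)]) ≤ pvMeas r c S N Q := by
    have hbox : ((u.1 + d.1, u.2 + d.2) : Int × Int) ∈ pvBox r c \ (S ∪ N) := by
      rw [Finset.mem_sdiff]
      exact ⟨by simp [pvBox, Finset.mem_Ico]; omega, hvnot⟩
    have hcard : (pvBox r c \ (S ∪ insert (u.1 + d.1, u.2 + d.2) N)).card =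
        (pvBox r c \ (S ∪ N)).card - 1 := by
      rw [hunion, Finset.sdiff_insert, Finset.card_erase_of_mem hbox]
    have hpos : 0 < (pvBox r c \ (S ∪ N)).card := Finset.card_pos.mpr ⟨_, hbox⟩
    unfold pvMeas
    rw [hcard]
    simp
    omega
  have hmem' : (pvOk r c g (u.1 + d.1, u.2 + d.2) →
      ((u.1 + d.1, u.2 + d.2) : Int × Int) ∈ S ∪ insert (u.1 + d.1, u.2 + d.2) N) :=
    fun _ => Finset.mem_union_right _ (Finset.mem_insert_self _ _)
  by_cases ho : pvA_cell g (u.1 + d.1) (u.2 + d.2) = "o"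
  · refine ⟨insert (u.1 + d.1, u.2 + d.2) N, Q ++ [(u.1 + d.1, u.2 + d.2)],
      pvA_vset V (u.1 + d.1) (u.2 + d.2), sc + 1, wc,
      by simp [pvA_nbr, hb, hvis, ho], hsub, ?_, hcl', hmem', hmeas⟩
    refine hInv' _ _ ?_ ?_
    · rw [pvOCnt_insert hvnotN, if_pos ho, hscnt]; ring
    · rw [pvVCnt_insert hvnotN, if_neg (by simp [ho]), hwcnt]; ring
  by_cases hv : pvA_cell g (u.1 + d.1) (u.2 + d.2) = "v"
  · refine ⟨insert (u.1 + d.1, u.2 + d.2) N, Q ++ [(u.1 + d.1, u.2 + d.2)],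
      pvA_vset V (u.1 + d.1) (u.2 + d.2), sc, wc + 1,
      by simp [pvA_nbr, hb, hvis, hv], hsub, ?_, hcl', hmem', hmeas⟩
    refine hInv' _ _ ?_ ?_
    · rw [pvOCnt_insert hvnotN, if_neg ho, hscnt]; ring
    · rw [pvVCnt_insert hvnotN, if_pos hv, hwcnt]; ring
  · refine ⟨insert (u.1 + d.1, u.2 + d.2) N, Q ++ [(u.1 + d.1, u.2 + d.2)],
      pvA_vset V (u.1 + d.1) (u.2 + d.2), sc, wc,
      by simp [pvA_nbr, hb, hsharp, hvis, ho, hv], hsub, ?_, hcl', hmem', hmeas⟩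
    refine hInv' _ _ ?_ ?_
    · rw [pvOCnt_insert hvnotN, if_neg ho, hscnt]; ring
    · rw [pvVCnt_insert hvnotN, if_neg hv, hwcnt]; ring

theorem pvA_fold_spec {r c : Int} {g : List (List String)} {S : Finset (Int × Int)}
    {s0 w0 : Int} {t u : Int × Int}
    (ds : List (Int × Int)) (hds : ∀ d ∈ ds, d ∈ pvA_move) :
    ∀ {Q : List (Int × Int)} {V : List (List Bool)} {sc wc : Int} {N : Finset (Int × Int)},
      u ∈ N → pvInvA r c g S s0 w0 t Q V sc wc N → pvCloseQ r c g S N (u :: Q) →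
    ∃ N' Q' V' sc' wc', ds.foldl (pvA_nbr r c g u) (Q, V, sc, wc) = (Q', V', sc', wc') ∧
      N ⊆ N' ∧ pvInvA r c g S s0 w0 t Q' V' sc' wc' N' ∧
      pvCloseQ r c g S N' (u :: Q') ∧
      (∀ d ∈ ds, pvOk r c g (u.1 + d.1, u.2 + d.2) → (u.1 + d.1, u.2 + d.2) ∈ S ∪ N') ∧
      pvMeas r c S N' Q' ≤ pvMeas r c S N Q := by
  revert hds
  induction ds with
  | nil =>
    intro _ Q V sc wc N hu hInv hcl
    exact ⟨N, Q, V, sc, wc, rfl, Finset.Subset.refl _, hInv, hcl, by simp, le_refl _⟩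
  | cons d ds ih =>
    intro hds Q V sc wc N hu hInv hcl
    obtain ⟨N1, Q1, V1, sc1, wc1, heq, hsub1, hInv1, hcl1, hok1, hm1⟩ :=
      pvA_nbr_spec (hds d (by simp)) hu hInv hcl
    obtain ⟨N2, Q2, V2, sc2, wc2, heq2, hsub2, hInv2, hcl2, hok2, hm2⟩ :=
      ih (fun d' hd' => hds d' (List.mem_cons_of_mem _ hd')) (hsub1 hu) hInv1 hcl1
    refine ⟨N2, Q2, V2, sc2, wc2, ?_, hsub1.trans hsub2, hInv2, hcl2, ?_, hm2.trans hm1⟩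
    · rw [List.foldl_cons, heq, heq2]
    · intro d' hd' hok'
      rcases List.mem_cons.mp hd' with h | h
      · subst h
        exact Finset.union_subset_union_right hsub2 (hok1 hok')
      · exact hok2 d' h hok'

theorem pvA_loop_spec {r c : Int} {g : List (List String)} {S : Finset (Int × Int)}
    {s0 w0 : Int} {t : Int × Int} :
    ∀ (fuel : Nat) (Q : List (Int × Int)) (V : List (List Bool)) (sc wc : Int)
      (N : Finset (Int × Int)),
      pvInvA r c g S s0 w0 t Q V sc wc N → pvCloseQ r c g S N Q →
      pvMeas r c S N Q ≤ fuel →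
    ∃ N' V', pvA_bfsLoop r c g fuel (Q, V, sc, wc) =
        (V', s0 + pvOCnt g N', w0 + pvVCnt g N') ∧
      N ⊆ N' ∧ pvDims r c V' ∧ pvVrep r c V' (S ∪ N') ∧
      (∀ p ∈ N', pvReach r c g t p ∧ pvOk r c g p ∧ p ∉ S) ∧
      pvCloseQ r c g S N' [] := by
  intro fuel
  induction fuel with
  | zero =>
    intro Q V sc wc N hInv hcl hm
    have hQ : Q = [] := by
      have : Q.length = 0 := by unfold pvMeas at hm; omega
      exact List.length_eq_zero_iff.mp this
    subst hQ
    exact ⟨N, V, by simp [pvA_bfsLoop, hInv.scnt, hInv.wcnt], Finset.Subset.refl _,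
      hInv.dims, hInv.rep,
      fun p hp => ⟨hInv.nreach p hp, hInv.nok p hp, hInv.ndisj p hp⟩, hcl⟩
  | succ fuel ih =>
    intro Q V sc wc N hInv hcl hm
    cases Q with
    | nil =>
      exact ⟨N, V, by simp [pvA_bfsLoop, hInv.scnt, hInv.wcnt], Finset.Subset.refl _,
        hInv.dims, hInv.rep,
        fun p hp => ⟨hInv.nreach p hp, hInv.nok p hp, hInv.ndisj p hp⟩, hcl⟩
    | cons u rest =>
      have hu : u ∈ N := hInv.qmem u (by simp)
      have hInvR : pvInvA r c g S s0 w0 t rest V sc wc N :=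
        ⟨hInv.dims, hInv.rep, fun q hq => hInv.qmem q (List.mem_cons_of_mem _ hq),
          hInv.qnodup.of_cons, hInv.nok, hInv.nreach, hInv.ndisj, hInv.scnt, hInv.wcnt⟩
      obtain ⟨N1, Q1, V1, sc1, wc1, heq, hsub, hInv1, hcl1, hcov, hm1⟩ :=
        pvA_fold_spec (r := r) (c := c) (g := g) pvA_move (fun d hd => hd) hu hInvR hcl
      have hcl2 : pvCloseQ r c g S N1 Q1 := by
        intro p hp hpQ v hadjv
        by_cases hpu : p = u
        · subst hpu
          obtain ⟨hvok, d, hdm, hvd⟩ := hadjv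
          subst hvd
          exact hcov d hdm hvok
        · exact hcl1 p hp (by simp [hpu, hpQ]) v hadjv
      have hmR : pvMeas r c S N rest ≤ fuel := by
        unfold pvMeas at hm ⊢
        simp only [List.length_cons] at hm
        omega
      obtain ⟨N', V', heq', hsub', hrest⟩ := ih Q1 V1 sc1 wc1 N1 hInv1 hcl2 (hm1.trans hmR)
      refine ⟨N', V', ?_, hsub.trans hsub', hrest⟩
      show pvA_bfsLoop r c g (fuel + 1) (u :: rest, V, sc, wc) = _
      simp only [pvA_bfsLoop]
      rw [heq, heq']

theorem pvA_bfs_spec {r c : Int} {g : List (List String)} {S : Finset (Int × Int)}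
    {V : List (List Bool)} {i j : Int}
    (hScl : pvClosed r c g S) (hdims : pvDims r c V) (hrep : pvVrep r c V S)
    (hok : pvOk r c g (i, j)) (hnS : (i, j) ∉ S) :
    ∃ N V', pvA_bfs r c g V i j = (V', pvOCnt g N, pvVCnt g N) ∧
      (∀ p, p ∈ N ↔ pvReach r c g (i, j) p) ∧
      pvDims r c V' ∧ pvVrep r c V' (S ∪ N) ∧ pvClosed r c g (S ∪ N) := by
  obtain ⟨hi0, hir, hj0, hjc, hsharp⟩ := hok
  have hrep1 : pvVrep r c (pvA_vset V i j) (S ∪ {(i, j)}) := by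
    rw [Finset.union_comm, Finset.singleton_union]
    simpa using pvVrep_vset hdims hrep hi0 hir hj0 hjc
  have hInv0 : pvInvA r c g S 0 0 (i, j) [(i, j)] (pvA_vset V i j)
      (if pvA_cell g i j = "o" then ((1 : Int), (0 : Int))
        else if pvA_cell g i j = "v" then (0, 1) else (0, 0)).1
      (if pvA_cell g i j = "o" then ((1 : Int), (0 : Int))
        else if pvA_cell g i j = "v" then (0, 1) else (0, 0)).2 {(i, j)} := by
    refine ⟨pvDims_vset hdims hi0 hir hj0 hjc, hrep1,
      by simp, List.nodup_singleton _, ?_, ?_, ?_, ?_, ?_⟩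
    · intro p hp; rw [Finset.mem_singleton] at hp; subst hp
      exact ⟨hi0, hir, hj0, hjc, hsharp⟩
    · intro p hp; rw [Finset.mem_singleton] at hp; subst hp
      exact Relation.ReflTransGen.refl
    · intro p hp; rw [Finset.mem_singleton] at hp; subst hp; exact hnS
    · rw [pvOCnt_singleton]
      by_cases ho : pvA_cell g i j = "o" <;>
        by_cases hv : pvA_cell g i j = "v" <;> simp [ho, hv]
    · rw [pvVCnt_singleton]
      by_cases ho : pvA_cell g i j = "o" <;>
        by_cases hv : pvA_cell g i j = "v" <;> simp [ho, hv]
  have hcl0 : pvCloseQ r c g S {(i, j)} [(i, j)] := by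
    intro p hp hpQ
    rw [Finset.mem_singleton] at hp
    exact absurd (by simp [hp]) hpQ
  have hm0 : pvMeas r c S {(i, j)} [(i, j)] ≤ 2 * r.toNat * c.toNat + 1 := by
    have h1 : (pvBox r c \ (S ∪ {(i, j)})).card ≤ (pvBox r c).card :=
      Finset.card_le_card (Finset.sdiff_subset)
    have h2 : (pvBox r c).card = r.toNat * c.toNat := by
      unfold pvBox
      rw [Finset.card_product, Int.card_Ico, Int.card_Ico]
      simp
    unfold pvMeas
    simp only [List.length_singleton]
    have h3 : (pvBox r c \ (S ∪ {(i, j)})).card ≤ r.toNat * c.toNat := h2 ▸ h1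
    calc 1 + 2 * (pvBox r c \ (S ∪ {(i, j)})).card
        ≤ 1 + 2 * (r.toNat * c.toNat) := by
          have := Nat.mul_le_mul_left 2 h3
          exact Nat.add_le_add_left this 1
      _ = 2 * r.toNat * c.toNat + 1 := by ring
  obtain ⟨N', V', heq, hsub, hdims', hrep', hprops, hcl'⟩ :=
    pvA_loop_spec (2 * r.toNat * c.toNat + 1) [(i, j)] (pvA_vset V i j) _ _
      {(i, j)} hInv0 hcl0 hm0
  have hchar : ∀ p, p ∈ N' ↔ pvReach r c g (i, j) p := by
    intro p
    constructor
    · exact fun hp => (hprops p hp).1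
    · intro hre
      induction hre with
      | refl => exact hsub (Finset.mem_singleton_self _)
      | @tail x y hrx hadj ihm =>
        have hy : y ∈ S ∪ N' := hcl' x ihm (List.not_mem_nil) y hadj
        rcases Finset.mem_union.mp hy with h | h
        · exact absurd h
            (pvReach_not_mem hScl hnS ⟨hi0, hir, hj0, hjc, hsharp⟩
              (Relation.ReflTransGen.tail hrx hadj))
        · exact h
  refine ⟨N', V', ?_, hchar, hdims', hrep', ?_⟩
  · unfold pvA_bfs
    rw [heq]
    simp
  · constructor
    · intro p hp
      rcases Finset.mem_union.mp hp with h | h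
      · exact hScl.1 p h
      · exact (hprops p h).2.1
    · intro p hp v hadj
      rcases Finset.mem_union.mp hp with h | h
      · exact Finset.mem_union_left _ (hScl.2 p h v hadj)
      · exact hcl' p h (List.not_mem_nil) v hadj

-- initial counts agree with the per-row count sums
theorem pvRow_count (row : List String) (a b : Int) :
    row.foldl (fun (p : Int × Int) e =>
      if e = "o" then (p.1 + 1, p.2) else if e = "v" then (p.1, p.2 + 1) else p) (a, b) =
      (a + (PySem.List.count row "o" : Int), b + (PySem.List.count row "v" : Int)) := by
  induction row generalizing a b with
  | nil => simp [PySem.List.count_eq]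
  | cons e row ih =>
    simp only [List.foldl_cons, PySem.List.count_eq] at ih ⊢
    by_cases ho : e = "o"
    · rw [if_pos ho, ih]
      simp [ho]
      ring
    · rw [if_neg ho]
      by_cases hv : e = "v"
      · rw [if_pos hv, ih]
        simp [hv]
        ring
      · rw [if_neg hv, ih]
        have h1 : ¬((e == "o") = true) := by simpa using ho
        have h2 : ¬((e == "v") = true) := by simpa using hv
        simp [List.count_cons, h1, h2]

theorem pvInit_count (g : List (List String)) :
    pvA_initCount g = ((g.map (fun row => (PySem.List.count row "o" : Int))).sum,
      (g.map (fun row => (PySem.List.count row "v" : Int))).sum) := by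
  suffices h : ∀ (g : List (List String)) (a b : Int),
      g.foldl (fun acc row =>
        row.foldl (fun (p : Int × Int) e =>
          if e = "o" then (p.1 + 1, p.2) else if e = "v" then (p.1, p.2 + 1) else p) acc) (a, b) =
      (a + (g.map (fun row => (PySem.List.count row "o" : Int))).sum,
        b + (g.map (fun row => (PySem.List.count row "v" : Int))).sum) by
    unfold pvA_initCount
    rw [h g 0 0]
    simp
  intro g
  induction g with
  | nil => simp
  | cons row g ih =>
    intro a b
    simp only [List.foldl_cons, List.map_cons, List.sum_cons]
    rw [pvRow_count, ih, Prod.mk.injEq]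
    constructor <;> ring

-- ===== canonical per-component value both programs compute =====
noncomputable def pvFilterP {α : Type} (P : α → Prop) (s : Finset α) : Finset α :=
  @Finset.filter α P (fun _ => Classical.propDecidable _) s

theorem pvMem_filterP {α : Type} {P : α → Prop} {s : Finset α} {x : α} :
    x ∈ pvFilterP P s ↔ x ∈ s ∧ P x := by
  unfold pvFilterP
  exact @Finset.mem_filter _ _ (fun _ => Classical.propDecidable _) _ _

noncomputable def pvCls (r c : Int) (g : List (List String)) (p : Int × Int) :
    Finset (Int × Int) :=
  pvFilterP (fun q => pvReach r c g p q) (pvBox r c)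

noncomputable def pvTerm (g : List (List String)) (C : Finset (Int × Int)) : Int × Int :=
  if pvOCnt g C ≤ pvVCnt g C then (pvOCnt g C, 0) else (0, pvVCnt g C)

noncomputable def pvOkCells (r c : Int) (g : List (List String)) : Finset (Int × Int) :=
  pvFilterP (fun p => pvOk r c g p) (pvBox r c)

noncomputable def pvCompsAll (r c : Int) (g : List (List String)) :
    Finset (Finset (Int × Int)) :=
  (pvOkCells r c g).image (pvCls r c g)

noncomputable def pvCanon (r c : Int) (g : List (List String)) : Int × Int :=
  (pvCompsAll r c g).sum (fun C => pvTerm g C)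

def pvTotO (g : List (List String)) : Int :=
  (g.map (fun row => (PySem.List.count row "o" : Int))).sum

def pvTotV (g : List (List String)) : Int :=
  (g.map (fun row => (PySem.List.count row "v" : Int))).sum

-- reach is an equivalence on ok cells
theorem pvReach_symm {r c : Int} {g : List (List String)} {p q : Int × Int}
    (hok : pvOk r c g p) (h : pvReach r c g p q) : pvReach r c g q p := by
  induction h with
  | refl => exact Relation.ReflTransGen.refl
  | @tail u v hru hadj ih =>
    exact Relation.ReflTransGen.head (pvAdj_symm (pvReach_ok hok hru) hadj) ih

theorem pvMem_box_of_ok {r c : Int} {g : List (List String)} {p : Int × Int}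
    (h : pvOk r c g p) : p ∈ pvBox r c := by
  obtain ⟨h1, h2, h3, h4, _⟩ := h
  simp [pvBox, Finset.mem_Ico]
  omega

theorem pvMem_cls {r c : Int} {g : List (List String)} {p q : Int × Int}
    (hok : pvOk r c g p) : q ∈ pvCls r c g p ↔ pvReach r c g p q := by
  unfold pvCls
  rw [pvMem_filterP]
  constructor
  · exact fun h => h.2
  · intro h
    exact ⟨pvMem_box_of_ok (pvReach_ok hok h), h⟩

theorem pvCls_eq_of_reach {r c : Int} {g : List (List String)} {p q : Int × Int}
    (hok : pvOk r c g p) (h : pvReach r c g p q) : pvCls r c g q = pvCls r c g p := by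
  have hokq : pvOk r c g q := pvReach_ok hok h
  ext x
  rw [pvMem_cls hokq, pvMem_cls hok]
  constructor
  · exact fun hx => h.trans hx
  · exact fun hx => (pvReach_symm hok h).trans hx

theorem pvClosed_reach {r c : Int} {g : List (List String)} {S : Finset (Int × Int)}
    (hS : pvClosed r c g S) {p q : Int × Int} (hp : p ∈ S) (h : pvReach r c g p q) :
    q ∈ S := by
  induction h with
  | refl => exact hp
  | tail _ hadj ih => exact hS.2 _ ih _ hadj

-- ===== generic raster sweep (nested fold over ranges) with a processed-cell list =====
def pvRasterL (r c : Int) : List (Int × Int) :=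
  (PySem.List.pyRange 0 r 1).flatMap (fun i => (PySem.List.pyRange 0 c 1).map (fun j => (i, j)))

theorem pvMem_rasterL {r c : Int} {p : Int × Int} :
    p ∈ pvRasterL r c ↔ 0 ≤ p.1 ∧ p.1 < r ∧ 0 ≤ p.2 ∧ p.2 < c := by
  unfold pvRasterL
  simp only [List.mem_flatMap, List.mem_map, PySem.List.mem_pyRange_one]
  constructor
  · rintro ⟨i, ⟨hi0, hi1⟩, j, ⟨hj0, hj1⟩, rfl⟩
    exact ⟨hi0, hi1, hj0, hj1⟩
  · rintro ⟨h1, h2, h3, h4⟩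
    exact ⟨p.1, ⟨h1, h2⟩, p.2, ⟨h3, h4⟩, rfl⟩

theorem pvNodup_rasterL (r c : Int) : (pvRasterL r c).Nodup := by
  unfold pvRasterL
  rw [List.nodup_flatMap]
  constructor
  · intro i _
    exact (PySem.List.nodup_pyRange_one 0 c).map (fun a b h => congrArg Prod.snd h)
  · refine (PySem.List.pairwise_lt_pyRange_one (a := 0) (b := r)).imp ?_
    intro a b hab x hxa hxb
    simp only [List.mem_map] at hxa hxb
    obtain ⟨j1, _, rfl⟩ := hxa
    obtain ⟨j2, _, h2⟩ := hxb
    have := congrArg Prod.fst h2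
    simp at this
    omega

theorem pvRasterFold {σ : Type} (r c : Int) (step : σ → Int → Int → σ)
    (Inv : List (Int × Int) → σ → Prop)
    (hstep : ∀ L st i j, 0 ≤ i → i < r → 0 ≤ j → j < c → Inv L st →
      Inv (L ++ [(i, j)]) (step st i j))
    (st0 : σ) (h0 : Inv [] st0) :
    Inv (pvRasterL r c)
      ((PySem.List.pyRange 0 r 1).foldl
        (fun st i => (PySem.List.pyRange 0 c 1).foldl (fun st j => step st i j) st) st0) := by
  have inner : ∀ (i : Int), 0 ≤ i → i < r → ∀ (js : List Int), (∀ j ∈ js, 0 ≤ j ∧ j < c) →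
      ∀ L st, Inv L st →
      Inv (L ++ js.map (fun j => (i, j))) (js.foldl (fun st j => step st i j) st) := by
    intro i hi0 hi1 js
    induction js with
    | nil => intro _ L st h; simpa using h
    | cons j js ih =>
      intro hjs L st h
      have h1 := hstep L st i j hi0 hi1 (hjs j (by simp)).1 (hjs j (by simp)).2 h
      have h2 := ih (fun x hx => hjs x (by simp [hx])) (L ++ [(i, j)]) _ h1
      simpa [List.append_assoc] using h2
  have outer : ∀ (is : List Int), (∀ i ∈ is, 0 ≤ i ∧ i < r) →
      ∀ L st, Inv L st →
      Inv (L ++ is.flatMap (fun i => (PySem.List.pyRange 0 c 1).map (fun j => (i, j))))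
        (is.foldl (fun st i => (PySem.List.pyRange 0 c 1).foldl (fun st j => step st i j) st) st) := by
    intro is
    induction is with
    | nil => intro _ L st h; simpa using h
    | cons i is ih =>
      intro his L st h
      have h1 := inner i (his i (by simp)).1 (his i (by simp)).2 (PySem.List.pyRange 0 c 1)
        (fun j hj => PySem.List.mem_pyRange_one.mp hj) L st h
      have h2 := ih (fun x hx => his x (by simp [hx])) _ _ h1
      simpa [List.append_assoc] using h2
  have h := outer (PySem.List.pyRange 0 r 1) (fun i hi => PySem.List.mem_pyRange_one.mp hi) [] st0 h0
  simpa [pvRasterL] using h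

-- a closed set that contains every non-'#'/'.' window cell carries the whole canonical sum
theorem pvSum_eq_canon {r c : Int} {g : List (List String)} {S : Finset (Int × Int)}
    (hclosed : pvClosed r c g S)
    (hcov : ∀ p : Int × Int, 0 ≤ p.1 → p.1 < r → 0 ≤ p.2 → p.2 < c →
      pvA_cell g p.1 p.2 ∉ (["#", "."] : List String) → p ∈ S) :
    (S.image (pvCls r c g)).sum (fun C => pvTerm g C) = pvCanon r c g := by
  unfold pvCanon pvCompsAll
  refine Finset.sum_subset ?_ ?_
  · intro C hC
    obtain ⟨p, hp, rfl⟩ := Finset.mem_image.mp hC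
    have hok := hclosed.1 p hp
    exact Finset.mem_image.mpr ⟨p, pvMem_filterP.mpr ⟨pvMem_box_of_ok hok, hok⟩, rfl⟩
  · intro C hC hCn
    obtain ⟨p, hp, rfl⟩ := Finset.mem_image.mp hC
    have hok : pvOk r c g p := (pvMem_filterP.mp hp).2
    have hempty : ∀ q ∈ pvCls r c g p,
        pvA_cell g q.1 q.2 = "o" ∨ pvA_cell g q.1 q.2 = "v" → False := by
      intro q hq hanim
      have hre : pvReach r c g p q := (pvMem_cls hok).mp hq
      have hokq : pvOk r c g q := pvReach_ok hok hre
      have hqS : q ∈ S := by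
        refine hcov q hokq.1 hokq.2.1 hokq.2.2.1 hokq.2.2.2.1 ?_
        rcases hanim with h | h <;> simp [h]
      have : pvCls r c g q = pvCls r c g p := pvCls_eq_of_reach hok hre
      exact hCn (Finset.mem_image.mpr ⟨q, hqS, this⟩)
    have ho : pvOCnt g (pvCls r c g p) = 0 := by
      unfold pvOCnt
      rw [Finset.filter_eq_empty_iff.mpr (fun q hq hcell => hempty q hq (Or.inl hcell))]
      simp
    have hv : pvVCnt g (pvCls r c g p) = 0 := by
      unfold pvVCnt
      rw [Finset.filter_eq_empty_iff.mpr (fun q hq hcell => hempty q hq (Or.inr hcell))]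
      simp
    simp [pvTerm, ho, hv]

-- ===== A equals the canonical value =====
theorem pvA_step_inv {r c : Int} {g : List (List String)} {S : Finset (Int × Int)}
    {st : List (List Bool) × Int × Int} {i j : Int}
    (hi0 : 0 ≤ i) (hi1 : i < r) (hj0 : 0 ≤ j) (hj1 : j < c)
    (hdims : pvDims r c st.1) (hrep : pvVrep r c st.1 S) (hclosed : pvClosed r c g S)
    (hs : st.2.1 = pvTotO g - ((S.image (pvCls r c g)).sum (fun C => pvTerm g C)).1)
    (hw : st.2.2 = pvTotV g - ((S.image (pvCls r c g)).sum (fun C => pvTerm g C)).2) :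
    ∃ S', S ⊆ S' ∧
      pvDims r c (pvA_cellStep r c g st i j).1 ∧
      pvVrep r c (pvA_cellStep r c g st i j).1 S' ∧
      pvClosed r c g S' ∧
      (pvA_cellStep r c g st i j).2.1 =
        pvTotO g - ((S'.image (pvCls r c g)).sum (fun C => pvTerm g C)).1 ∧
      (pvA_cellStep r c g st i j).2.2 =
        pvTotV g - ((S'.image (pvCls r c g)).sum (fun C => pvTerm g C)).2 ∧
      (pvA_cell g i j ∉ (["#", "."] : List String) → (i, j) ∈ S') := by
  by_cases hskip : pvA_cell g i j ∈ (["#", "."] : List String)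
  · have hst : pvA_cellStep r c g st i j = st := by
      unfold pvA_cellStep
      rw [if_pos hskip]
    rw [hst]
    exact ⟨S, Finset.Subset.refl _, hdims, hrep, hclosed, hs, hw,
      fun hc => absurd hskip hc⟩
  by_cases hvis : pvA_vget st.1 i j = true
  · have hst : pvA_cellStep r c g st i j = st := by
      unfold pvA_cellStep
      rw [if_neg hskip, if_pos hvis]
    rw [hst]
    exact ⟨S, Finset.Subset.refl _, hdims, hrep, hclosed, hs, hw,
      fun _ => (hrep i j hi0 hi1 hj0 hj1).mp hvis⟩
  · have hsharp : pvA_cell g i j ≠ "#" := by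
      intro h
      exact hskip (by simp [h])
    have hok : pvOk r c g (i, j) := ⟨hi0, hi1, hj0, hj1, hsharp⟩
    have hnS : (i, j) ∉ S := fun h => hvis ((hrep i j hi0 hi1 hj0 hj1).mpr h)
    obtain ⟨N, V', heq, hchar, hdims', hrep', hclosed'⟩ :=
      pvA_bfs_spec (V := st.1) hclosed hdims hrep hok hnS
    have hNcls : N = pvCls r c g (i, j) :=
      Finset.ext fun q => (hchar q).trans (pvMem_cls hok).symm
    have hij_mem : (i, j) ∈ N := (hchar _).mpr Relation.ReflTransGen.refl
    have hNim : (S ∪ N).image (pvCls r c g) = insert N (S.image (pvCls r c g)) := by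
      rw [Finset.image_union]
      have himg : N.image (pvCls r c g) = {N} := by
        apply Finset.eq_singleton_iff_nonempty_unique_mem.mpr
        refine ⟨⟨N, Finset.mem_image.mpr ⟨(i, j), hij_mem, hNcls.symm⟩⟩, ?_⟩
        intro C hC
        obtain ⟨q, hq, rfl⟩ := Finset.mem_image.mp hC
        rw [pvCls_eq_of_reach hok ((hchar q).mp hq), ← hNcls]
      rw [himg]
      rw [Finset.union_comm, Finset.insert_eq]
    have hNnot : N ∉ S.image (pvCls r c g) := by
      intro h
      obtain ⟨p, hp, hcp⟩ := Finset.mem_image.mp h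
      have hokp := hclosed.1 p hp
      have : (i, j) ∈ pvCls r c g p := hcp.symm ▸ hij_mem
      exact hnS (pvClosed_reach hclosed hp ((pvMem_cls hokp).mp this))
    have hsum : ((S ∪ N).image (pvCls r c g)).sum (fun C => pvTerm g C) =
        pvTerm g N + (S.image (pvCls r c g)).sum (fun C => pvTerm g C) := by
      rw [hNim, Finset.sum_insert hNnot]
    have hst : pvA_cellStep r c g st i j =
        (if pvOCnt g N ≤ pvVCnt g N then (V', st.2.1 - pvOCnt g N, st.2.2)
         else (V', st.2.1, st.2.2 - pvVCnt g N)) := by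
      unfold pvA_cellStep
      rw [if_neg hskip, if_neg hvis, heq]
    refine ⟨S ∪ N, Finset.subset_union_left, ?_, ?_, hclosed', ?_, ?_,
      fun _ => Finset.mem_union_right _ hij_mem⟩
    · rw [hst]; split_ifs <;> exact hdims'
    · rw [hst]; split_ifs <;> exact hrep'
    · rw [hst, hsum]
      by_cases hcmp : pvOCnt g N ≤ pvVCnt g N
      · rw [if_pos hcmp]
        have : (pvTerm g N).1 = pvOCnt g N := by simp [pvTerm, hcmp]
        simp only [Prod.fst_add, this, hs]
        ring
      · rw [if_neg hcmp]
        have : (pvTerm g N).1 = 0 := by simp [pvTerm, hcmp]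
        simp only [Prod.fst_add, this, hs]
        ring
    · rw [hst, hsum]
      by_cases hcmp : pvOCnt g N ≤ pvVCnt g N
      · rw [if_pos hcmp]
        have : (pvTerm g N).2 = 0 := by simp [pvTerm, hcmp]
        simp only [Prod.snd_add, this, hw]
        ring
      · rw [if_neg hcmp]
        have : (pvTerm g N).2 = pvVCnt g N := by simp [pvTerm, hcmp]
        simp only [Prod.snd_add, this, hw]
        ring

theorem pvA_canon (r c : Int) (g : List (List String)) :
    solution r c g = (pvTotO g - (pvCanon r c g).1, pvTotV g - (pvCanon r c g).2) := by
  have key := pvRasterFold r c (pvA_cellStep r c g)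
    (fun L st => ∃ S : Finset (Int × Int),
      pvDims r c st.1 ∧ pvVrep r c st.1 S ∧ pvClosed r c g S ∧
      st.2.1 = pvTotO g - ((S.image (pvCls r c g)).sum (fun C => pvTerm g C)).1 ∧
      st.2.2 = pvTotV g - ((S.image (pvCls r c g)).sum (fun C => pvTerm g C)).2 ∧
      (∀ p ∈ L, pvA_cell g p.1 p.2 ∉ (["#", "."] : List String) → p ∈ S))
    (by
      intro L st i j hi0 hi1 hj0 hj1 hInv
      obtain ⟨S, hdims, hrep, hclosed, hs, hw, hcov⟩ := hInv
      obtain ⟨S', hsub, hdims', hrep', hclosed', hs', hw', hmem⟩ :=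
        pvA_step_inv hi0 hi1 hj0 hj1 hdims hrep hclosed hs hw
      refine ⟨S', hdims', hrep', hclosed', hs', hw', ?_⟩
      intro p hp hpc
      rcases List.mem_append.mp hp with h | h
      · exact hsub (hcov p h hpc)
      · rw [List.mem_singleton] at h
        subst h
        exact hmem hpc)
    (List.replicate r.toNat (List.replicate c.toNat false), pvTotO g, pvTotV g)
    (by
      refine ⟨∅, ⟨by simp, ?_⟩,
        fun a b ha0 har hb0 hbc => by simp [pvVget_init ha0 har hb0 hbc],
        ⟨by simp, by simp⟩, by simp, by simp, by simp⟩
      intro row hrow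
      rw [List.eq_of_mem_replicate hrow]
      simp)
  obtain ⟨S, hdims, hrep, hclosed, hs, hw, hcov⟩ := key
  have hsum := pvSum_eq_canon hclosed (fun p h1 h2 h3 h4 hc =>
    hcov p (pvMem_rasterL.mpr ⟨h1, h2, h3, h4⟩) hc)
  have hsol : solution r c g =
      (((PySem.List.pyRange 0 r 1).foldl
          (fun st i => (PySem.List.pyRange 0 c 1).foldl
            (fun st j => pvA_cellStep r c g st i j) st)
          (List.replicate r.toNat (List.replicate c.toNat false), pvTotO g, pvTotV g)).2.1,
       ((PySem.List.pyRange 0 r 1).foldl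
          (fun st i => (PySem.List.pyRange 0 c 1).foldl
            (fun st j => pvA_cellStep r c g st i j) st)
          (List.replicate r.toNat (List.replicate c.toNat false), pvTotO g, pvTotV g)).2.2) := by
    unfold solution
    rw [pvInit_count]
    rfl
  rw [hsol, hs, hw, hsum]

-- ===== union-find: parent chains =====
def pvPar (par : List Int) (x : Int) : Int := PySem.List.pyGetD par x 0

def pvPStep (par : List Int) (x y : Int) : Prop :=
  0 ≤ x ∧ x < (par.length : Int) ∧ pvPar par x = y ∧ y ≠ x

def pvReaches (par : List Int) : Int → Int → Prop :=
  Relation.ReflTransGen (pvPStep par)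

def pvIsRoot (par : List Int) (x : Int) : Prop := pvPar par x = x

def pvRootIs (par : List Int) (x rt : Int) : Prop :=
  pvReaches par x rt ∧ pvIsRoot par rt

theorem pvReaches_root_det {par : List Int} {a b : Int}
    (h : pvReaches par a b) (ha : pvIsRoot par a) : b = a := by
  induction h with
  | refl => rfl
  | tail h1 h2 ih =>
    subst ih
    exact (h2.2.2.1.symm.trans ha)

theorem pvRootIs_unique {par : List Int} {x r1 r2 : Int}
    (h1 : pvRootIs par x r1) (h2 : pvRootIs par x r2) : r1 = r2 := by
  obtain ⟨hre1, hrt1⟩ := h1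
  obtain ⟨hre2, hrt2⟩ := h2
  revert hre2
  induction hre1 using Relation.ReflTransGen.head_induction_on with
  | refl =>
    intro hre2
    exact (pvReaches_root_det hre2 hrt1).symm
  | head hstep htl ih =>
    intro hre2
    rcases hre2.cases_head with heq | ⟨c', hstep', hre2'⟩
    · obtain ⟨_, _, hpe, hne⟩ := hstep
      rw [← heq] at hrt2
      exact absurd (hpe.symm.trans hrt2) hne
    · have : c' = _ := hstep'.2.2.1.symm.trans hstep.2.2.1
      exact ih (this ▸ hre2')

-- invariant the union pass maintains, for an abstract edge relation E
structure pvUF (n : Int) (par : List Int) (E : Int → Int → Prop) : Prop where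
  len : par.length = (n.toNat : Nat)
  inRange : ∀ x, 0 ≤ x → x < (par.length : Int) →
    0 ≤ pvPar par x ∧ pvPar par x < (par.length : Int)
  acyc : ∃ d : Int → Nat, ∀ x, 0 ≤ x → x < (par.length : Int) →
    pvPar par x ≠ x → d (pvPar par x) < d x
  conn : ∀ x y, 0 ≤ x → x < (par.length : Int) → 0 ≤ y → y < (par.length : Int) →
    ((∃ rt, pvRootIs par x rt ∧ pvRootIs par y rt) ↔ Relation.EqvGen E x y)

theorem pvRoot_exists {n : Int} {par : List Int} {E : Int → Int → Prop}
    (hUF : pvUF n par E) {x : Int} (h0 : 0 ≤ x) (h1 : x < (par.length : Int)) :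
    ∃ rt, pvRootIs par x rt ∧ 0 ≤ rt ∧ rt < (par.length : Int) := by
  obtain ⟨d, hd⟩ := hUF.acyc
  suffices H : ∀ (m : Nat) (x : Int), d x = m → 0 ≤ x → x < (par.length : Int) →
      ∃ rt, pvRootIs par x rt ∧ 0 ≤ rt ∧ rt < (par.length : Int) from
    H (d x) x rfl h0 h1
  intro m
  induction m using Nat.strong_induction_on with
  | _ m ih =>
    intro x hdx hx0 hx1
    by_cases hr : pvPar par x = x
    · exact ⟨x, ⟨Relation.ReflTransGen.refl, hr⟩, hx0, hx1⟩
    · obtain ⟨hy0, hy1⟩ := hUF.inRange x hx0 hx1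
      obtain ⟨rt, hrt, hb⟩ := ih (d (pvPar par x)) (hdx ▸ hd x hx0 hx1 hr) _ rfl hy0 hy1
      exact ⟨rt, ⟨Relation.ReflTransGen.head ⟨hx0, hx1, rfl, hr⟩ hrt.1, hrt.2⟩, hb⟩

-- iterates of the parent map stay in range
theorem pvIter_range {n : Int} {par : List Int} {E : Int → Int → Prop}
    (hUF : pvUF n par E) {x : Int} (h0 : 0 ≤ x) (h1 : x < (par.length : Int)) :
    ∀ m : Nat, 0 ≤ (fun z => pvPar par z)^[m] x ∧
      (fun z => pvPar par z)^[m] x < (par.length : Int) := by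
  intro m
  induction m with
  | zero => simpa using ⟨h0, h1⟩
  | succ m ih =>
    rw [Function.iterate_succ_apply']
    exact hUF.inRange _ ih.1 ih.2

-- some iterate within par.length steps is a root (distinct-iterates cardinality argument)
theorem pvChain_short {n : Int} {par : List Int} {E : Int → Int → Prop}
    (hUF : pvUF n par E) {x : Int} (h0 : 0 ≤ x) (h1 : x < (par.length : Int)) :
    ∃ m ≤ par.length, pvIsRoot par ((fun z => pvPar par z)^[m] x) := by
  obtain ⟨d, hd⟩ := hUF.acyc
  by_contra hcon
  push Not at hcon
  have hin := pvIter_range hUF h0 h1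
  have hstep : ∀ m : Nat, m < par.length →
      d ((fun z => pvPar par z)^[m + 1] x) < d ((fun z => pvPar par z)^[m] x) := by
    intro m hm
    rw [Function.iterate_succ_apply']
    exact hd _ (hin m).1 (hin m).2 (hcon m (by omega))
  have hmono : ∀ k m : Nat, k < m → m ≤ par.length →
      d ((fun z => pvPar par z)^[m] x) < d ((fun z => pvPar par z)^[k] x) := by
    intro k m
    induction m with
    | zero => omega
    | succ m ih =>
      intro hk hm
      have h2 := hstep m (by omega)
      by_cases hkm : k = m
      · subst hkm; exact h2
      · exact h2.trans (ih (by omega) (by omega))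
  have hinj : Set.InjOn (fun m => (fun z => pvPar par z)^[m] x)
      ↑(Finset.range (par.length + 1)) := by
    intro a ha b hb hab
    simp only [Finset.coe_range, Set.mem_Iio] at ha hb
    simp only at hab
    by_contra hne
    rcases Nat.lt_or_ge a b with h' | h'
    · have h3 := hmono a b h' (by omega)
      rw [hab] at h3
      omega
    · have h'' : b < a := by omega
      have h3 := hmono b a h'' (by omega)
      rw [hab] at h3
      omega
  have hsub : (Finset.range (par.length + 1)).image (fun m => (fun z => pvPar par z)^[m] x)
      ⊆ Finset.Ico (0 : Int) (par.length : Int) := by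
    intro y hy
    simp only [Finset.mem_image] at hy
    obtain ⟨m, _, rfl⟩ := hy
    simp only [Finset.mem_Ico]
    exact ⟨(hin m).1, (hin m).2⟩
  have hcard := Finset.card_le_card hsub
  rw [Finset.card_image_of_injOn hinj, Finset.card_range, Int.card_Ico] at hcard
  simp at hcard

theorem pvFindF_spec {n : Int} {par : List Int} {E : Int → Int → Prop}
    (hUF : pvUF n par E) :
    ∀ (fuel : Nat) (x : Int) (m : Nat), m < fuel → 0 ≤ x → x < (par.length : Int) →
      pvIsRoot par ((fun z => pvPar par z)^[m] x) →
      pvRootIs par x (pvB_findF par fuel x) := by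
  intro fuel
  induction fuel with
  | zero => omega
  | succ f ih =>
    intro x m hm hx0 hx1 hroot
    by_cases hr : PySem.List.pyGetD par x 0 = x
    · have : pvB_findF par (f + 1) x = x := by simp [pvB_findF, hr]
      rw [this]
      exact ⟨Relation.ReflTransGen.refl, hr⟩
    · have hfe : pvB_findF par (f + 1) x = pvB_findF par f (pvPar par x) := by
        simp [pvB_findF, hr, pvPar]
      rw [hfe]
      cases m with
      | zero => exact absurd (by simpa using hroot) hr
      | succ m' =>
        have hroot' : pvIsRoot par ((fun z => pvPar par z)^[m'] (pvPar par x)) := by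
          rw [← Function.iterate_succ_apply]
          exact hroot
        obtain ⟨hy0, hy1⟩ := hUF.inRange x hx0 hx1
        have h := ih (pvPar par x) m' (by omega) hy0 hy1 hroot'
        exact ⟨Relation.ReflTransGen.head ⟨hx0, hx1, rfl, hr⟩ h.1, h.2⟩

-- the fuelled find returns the root
theorem pvFind_root {n : Int} {par : List Int} {E : Int → Int → Prop}
    (hUF : pvUF n par E) {x : Int} (h0 : 0 ≤ x) (h1 : x < (par.length : Int)) :
    pvRootIs par x (pvB_find par x) := by
  obtain ⟨m, hm, hroot⟩ := pvChain_short hUF h0 h1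
  exact pvFindF_spec hUF (par.length + 1) x m (by omega) h0 h1 hroot

theorem pvFind_eq_root {n : Int} {par : List Int} {E : Int → Int → Prop}
    (hUF : pvUF n par E) {x rt : Int} (h0 : 0 ≤ x) (h1 : x < (par.length : Int))
    (h : pvRootIs par x rt) : pvB_find par x = rt :=
  pvRootIs_unique (pvFind_root hUF h0 h1) h

-- adding one edge to EqvGen
theorem pvEqvGen_union {α : Type} (E : α → α → Prop) (a b : α) (x y : α) :
    Relation.EqvGen (fun u v => E u v ∨ (u = a ∧ v = b)) x y ↔
      (Relation.EqvGen E x y ∨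
       (Relation.EqvGen E x a ∧ Relation.EqvGen E b y) ∨
       (Relation.EqvGen E x b ∧ Relation.EqvGen E a y)) := by
  constructor
  · intro h
    induction h with
    | rel u v huv =>
      rcases huv with huv | ⟨rfl, rfl⟩
      · exact Or.inl (Relation.EqvGen.rel _ _ huv)
      · exact Or.inr (Or.inl ⟨Relation.EqvGen.refl _, Relation.EqvGen.refl _⟩)
    | refl u => exact Or.inl (Relation.EqvGen.refl _)
    | symm u v _ ih =>
      rcases ih with ih | ⟨ih1, ih2⟩ | ⟨ih1, ih2⟩
      · exact Or.inl (Relation.EqvGen.symm _ _ ih)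
      · exact Or.inr (Or.inr ⟨Relation.EqvGen.symm _ _ ih2, Relation.EqvGen.symm _ _ ih1⟩)
      · exact Or.inr (Or.inl ⟨Relation.EqvGen.symm _ _ ih2, Relation.EqvGen.symm _ _ ih1⟩)
    | trans u v w _ _ ih1 ih2 =>
      rcases ih1 with ih1 | ⟨ihA, ihB⟩ | ⟨ihA, ihB⟩ <;>
        rcases ih2 with ih2 | ⟨ihC, ihD⟩ | ⟨ihC, ihD⟩
      · exact Or.inl (Relation.EqvGen.trans _ _ _ ih1 ih2)
      · exact Or.inr (Or.inl ⟨Relation.EqvGen.trans _ _ _ ih1 ihC, ihD⟩)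
      · exact Or.inr (Or.inr ⟨Relation.EqvGen.trans _ _ _ ih1 ihC, ihD⟩)
      · exact Or.inr (Or.inl ⟨ihA, Relation.EqvGen.trans _ _ _ ihB ih2⟩)
      · exact Or.inl (Relation.EqvGen.trans _ _ _ ihA
          (Relation.EqvGen.trans _ _ _ (Relation.EqvGen.symm _ _ ihC)
            (Relation.EqvGen.trans _ _ _ (Relation.EqvGen.symm _ _ ihB) ihD)))
      · exact Or.inl (Relation.EqvGen.trans _ _ _ ihA ihD)
      · exact Or.inr (Or.inr ⟨ihA, Relation.EqvGen.trans _ _ _ ihB ih2⟩)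
      · exact Or.inl (Relation.EqvGen.trans _ _ _ ihA ihD)
      · exact Or.inl (Relation.EqvGen.trans _ _ _ ihA
          (Relation.EqvGen.trans _ _ _ (Relation.EqvGen.symm _ _ ihC)
            (Relation.EqvGen.trans _ _ _ (Relation.EqvGen.symm _ _ ihB) ihD)))
  · intro h
    have hmono : ∀ {u v}, Relation.EqvGen E u v →
        Relation.EqvGen (fun u v => E u v ∨ (u = a ∧ v = b)) u v :=
      fun h => Relation.EqvGen.mono (fun _ _ hv => Or.inl hv) h
    have hedge : Relation.EqvGen (fun u v => E u v ∨ (u = a ∧ v = b)) a b :=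
      Relation.EqvGen.rel _ _ (Or.inr ⟨rfl, rfl⟩)
    rcases h with h | ⟨h1, h2⟩ | ⟨h1, h2⟩
    · exact hmono h
    · exact Relation.EqvGen.trans _ _ _ (hmono h1)
        (Relation.EqvGen.trans _ _ _ hedge (hmono h2))
    · exact Relation.EqvGen.trans _ _ _ (hmono h1)
        (Relation.EqvGen.trans _ _ _ (Relation.EqvGen.symm _ _ hedge) (hmono h2))

theorem pvUF_congr {n : Int} {par : List Int} {E E' : Int → Int → Prop}
    (h : ∀ u v, E u v ↔ E' u v) (hUF : pvUF n par E) : pvUF n par E' := by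
  have : E = E' := funext fun u => funext fun v => propext (h u v)
  exact this ▸ hUF

theorem pvPar_set {par : List Int} {ry rx : Int} (h0 : 0 ≤ ry) (h1 : ry < (par.length : Int))
    {x : Int} (hx : 0 ≤ x) :
    pvPar (PySem.List.pySetD par ry rx) x = if x = ry then rx else pvPar par x := by
  have hset : PySem.List.pySetD par ry rx = par.set ry.toNat rx :=
    PySem.List.pySetD_of_nonneg par rx h0
  by_cases hxr : x = ry
  · subst hxr
    rw [if_pos rfl, hset]
    unfold pvPar
    rw [pvGetD_inrange _ _ _ hx (by simpa using h1)]
    rw [List.getElem_set_self]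
  · rw [if_neg hxr, hset]
    unfold pvPar
    by_cases hlt : x < (par.length : Int)
    · rw [pvGetD_inrange _ _ _ hx (by simpa using hlt), pvGetD_inrange _ _ _ hx hlt]
      rw [List.getElem_set_ne (by omega)]
    · have hxx : x = ((x.toNat : Nat) : Int) := by omega
      rw [hxx, PySem.List.pyGetD_natCast, PySem.List.pyGetD_natCast]
      rw [List.getD_eq_getElem?_getD, List.getD_eq_getElem?_getD]
      rw [List.getElem?_eq_none (by simp; omega), List.getElem?_eq_none (by omega)]

theorem pvRootIs_parent_iff {par : List Int} {x rt : Int}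
    (hstep : pvPStep par x (pvPar par x)) :
    pvRootIs par x rt ↔ pvRootIs par (pvPar par x) rt := by
  constructor
  · rintro ⟨hre, hrt⟩
    rcases hre.cases_head with heq | ⟨c', hstep', hre'⟩
    · exfalso
      subst heq
      exact hstep.2.2.2 hrt
    · have hc : c' = pvPar par x := hstep'.2.2.1.symm
      exact ⟨hc ▸ hre', hrt⟩
  · rintro ⟨hre, hrt⟩
    exact ⟨Relation.ReflTransGen.head hstep hre, hrt⟩

theorem pvReaches_range {n : Int} {par : List Int} {E : Int → Int → Prop} (hUF : pvUF n par E)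
    {z rt : Int} (hz0 : 0 ≤ z) (hz1 : z < (par.length : Int))
    (h : pvReaches par z rt) : 0 ≤ rt ∧ rt < (par.length : Int) := by
  induction h with
  | refl => exact ⟨hz0, hz1⟩
  | @tail u v hru hst ih =>
    rw [← hst.2.2.1]
    exact hUF.inRange u ih.1 ih.2

theorem pvRootIs_set {n : Int} {par : List Int} {E : Int → Int → Prop} (hUF : pvUF n par E)
    {rx ry : Int}
    (hrx0 : 0 ≤ rx) (_hrx1 : rx < (par.length : Int))
    (hry0 : 0 ≤ ry) (hry1 : ry < (par.length : Int))
    (hrootx : pvIsRoot par rx) (hrooty : pvIsRoot par ry) (hne : rx ≠ ry) :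
    ∀ (z rt : Int), 0 ≤ z → z < (par.length : Int) → pvRootIs par z rt →
      pvRootIs (PySem.List.pySetD par ry rx) z (if rt = ry then rx else rt) := by
  have hlen' : (PySem.List.pySetD par ry rx).length = par.length :=
    PySem.List.length_pySetD par ry rx
  have hps : ∀ x : Int, 0 ≤ x →
      pvPar (PySem.List.pySetD par ry rx) x = if x = ry then rx else pvPar par x :=
    fun x hx => pvPar_set hry0 hry1 hx
  intro z rt hz0 hz1 h
  obtain ⟨hre, hrt⟩ := h
  -- first: the old chain is still a chain in the new array (sources are never roots, so never ry)
  have hchain : pvReaches (PySem.List.pySetD par ry rx) z rt := by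
    induction hre using Relation.ReflTransGen.head_induction_on with
    | refl => exact Relation.ReflTransGen.refl
    | @head u cmid hst htl ih =>
      obtain ⟨hu0, hu1, hupar, hune⟩ := hst
      have huy : u ≠ ry := by
        intro h
        rw [h] at hupar hune
        exact hune (hupar.symm.trans hrooty)
      have hc0 : 0 ≤ cmid := by rw [← hupar]; exact (hUF.inRange u hu0 hu1).1
      have hc1 : cmid < (par.length : Int) := by rw [← hupar]; exact (hUF.inRange u hu0 hu1).2
      refine Relation.ReflTransGen.head ⟨hu0, by rw [hlen']; exact hu1, ?_, hune⟩ (ih hc0 hc1)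
      rw [hps u hu0, if_neg huy]
      exact hupar
  by_cases hrty : rt = ry
  · subst hrty
    rw [if_pos rfl]
    refine ⟨Relation.ReflTransGen.tail hchain ?_, ?_⟩
    · refine ⟨hry0, by rw [hlen']; exact hry1, ?_, hne⟩
      rw [hps _ hry0, if_pos rfl]
    · unfold pvIsRoot
      rw [hps _ hrx0, if_neg hne]
      exact hrootx
  · rw [if_neg hrty]
    refine ⟨hchain, ?_⟩
    unfold pvIsRoot
    have hrt0 : 0 ≤ rt := (pvReaches_range hUF hz0 hz1 hre).1
    rw [hps _ hrt0, if_neg hrty]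
    exact hrt

theorem pvUF_swapEdge {n : Int} {par : List Int} {E : Int → Int → Prop} {a b : Int}
    (h : pvUF n par (fun u v => E u v ∨ (u = b ∧ v = a))) :
    pvUF n par (fun u v => E u v ∨ (u = a ∧ v = b)) := by
  refine ⟨h.len, h.inRange, h.acyc, ?_⟩
  intro x y hx0 hx1 hy0 hy1
  rw [h.conn x y hx0 hx1 hy0 hy1, pvEqvGen_union E b a x y, pvEqvGen_union E a b x y]
  tauto

-- attaching root ry below root rx preserves the invariant, merging the two classes
set_option maxHeartbeats 1000000 in
theorem pvAttach {n : Int} {par : List Int} {E : Int → Int → Prop}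
    (hUF : pvUF n par E) {a b rx ry : Int}
    (ha0 : 0 ≤ a) (ha1 : a < (par.length : Int)) (hb0 : 0 ≤ b) (hb1 : b < (par.length : Int))
    (hra : pvRootIs par a rx) (hrb : pvRootIs par b ry) (hne : rx ≠ ry) :
    pvUF n (PySem.List.pySetD par ry rx) (fun u v => E u v ∨ (u = a ∧ v = b)) := by
  obtain ⟨Ra, hRa, hRa0, hRa1⟩ := pvRoot_exists hUF ha0 ha1
  obtain ⟨Rb, hRb, hRb0, hRb1⟩ := pvRoot_exists hUF hb0 hb1
  have hxeq : Ra = rx := pvRootIs_unique hRa hra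
  have hyeq : Rb = ry := pvRootIs_unique hRb hrb
  have hrx0 : 0 ≤ rx := hxeq ▸ hRa0
  have hrx1 : rx < (par.length : Int) := hxeq ▸ hRa1
  have hry0 : 0 ≤ ry := hyeq ▸ hRb0
  have hry1 : ry < (par.length : Int) := hyeq ▸ hRb1
  have hrootx : pvIsRoot par rx := hra.2
  have hrooty : pvIsRoot par ry := hrb.2
  have hlen' : (PySem.List.pySetD par ry rx).length = par.length :=
    PySem.List.length_pySetD par ry rx
  have hps : ∀ x : Int, 0 ≤ x →
      pvPar (PySem.List.pySetD par ry rx) x = if x = ry then rx else pvPar par x :=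
    fun x hx => pvPar_set hry0 hry1 hx
  -- the new root of anything is f (old root), f t = if t = ry then rx else t
  have hnewroot : ∀ z rt : Int, 0 ≤ z → z < (par.length : Int) → pvRootIs par z rt →
      pvRootIs (PySem.List.pySetD par ry rx) z (if rt = ry then rx else rt) :=
    pvRootIs_set hUF hrx0 hrx1 hry0 hry1 hrootx hrooty hne
  refine ⟨by rw [hlen']; exact hUF.len, ?_, ?_, ?_⟩
  · intro x hx0 hx1
    rw [hlen'] at hx1 ⊢
    rw [hps x hx0]
    split_ifs with h
    · exact ⟨hrx0, hrx1⟩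
    · exact hUF.inRange x hx0 hx1
  · obtain ⟨d, hd⟩ := hUF.acyc
    refine ⟨fun z => @ite _ (pvRootIs par z ry) (Classical.propDecidable _)
      (d z + d rx + 1) (d z), ?_⟩
    intro x hx0 hx1 hpx
    dsimp only
    rw [hlen'] at hx1
    rw [hps x hx0] at hpx ⊢
    by_cases hxy : x = ry
    · rw [if_pos hxy] at hpx ⊢
      rw [hxy]
      have h1 : pvRootIs par ry ry := ⟨Relation.ReflTransGen.refl, hrooty⟩
      have h2 : ¬ pvRootIs par rx ry := fun h =>
        hne (pvRootIs_unique ⟨Relation.ReflTransGen.refl, hrootx⟩ h)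
      rw [if_pos h1, if_neg h2]
      omega
    · rw [if_neg hxy] at hpx ⊢
      have hdd := hd x hx0 hx1 hpx
      have hiff : pvRootIs par x ry ↔ pvRootIs par (pvPar par x) ry :=
        pvRootIs_parent_iff ⟨hx0, hx1, rfl, hpx⟩
      by_cases hzy : pvRootIs par x ry
      · rw [if_pos hzy, if_pos (hiff.mp hzy)]
        omega
      · rw [if_neg hzy, if_neg (fun h => hzy (hiff.mpr h))]
        exact hdd
  · intro x y hx0 hx1 hy0 hy1
    rw [hlen'] at hx1 hy1
    obtain ⟨Rx, hRx, hRx0, hRx1⟩ := pvRoot_exists hUF hx0 hx1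
    obtain ⟨Ry, hRy, hRy0, hRy1⟩ := pvRoot_exists hUF hy0 hy1
    have hx' := hnewroot x Rx hx0 hx1 hRx
    have hy' := hnewroot y Ry hy0 hy1 hRy
    have hLHS : (∃ rt, pvRootIs (PySem.List.pySetD par ry rx) x rt ∧
        pvRootIs (PySem.List.pySetD par ry rx) y rt) ↔
        (if Rx = ry then rx else Rx) = (if Ry = ry then rx else Ry) := by
      constructor
      · rintro ⟨rt, h1, h2⟩
        rw [← pvRootIs_unique h1 hx', ← pvRootIs_unique h2 hy']
      · intro h
        exact ⟨_, hx', h ▸ hy'⟩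
    have hconXY : Relation.EqvGen E x y ↔ Rx = Ry := by
      rw [← hUF.conn x y hx0 hx1 hy0 hy1]
      constructor
      · rintro ⟨rt, h1, h2⟩
        rw [← pvRootIs_unique h1 hRx, ← pvRootIs_unique h2 hRy]
      · intro h
        exact ⟨Rx, hRx, h ▸ hRy⟩
    have hconXA : Relation.EqvGen E x a ↔ Rx = rx := by
      rw [← hUF.conn x a hx0 hx1 ha0 ha1]
      constructor
      · rintro ⟨rt, h1, h2⟩
        rw [← pvRootIs_unique h1 hRx, ← pvRootIs_unique h2 hra]
      · intro h
        exact ⟨Rx, hRx, h ▸ hra⟩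
    have hconXB : Relation.EqvGen E x b ↔ Rx = ry := by
      rw [← hUF.conn x b hx0 hx1 hb0 hb1]
      constructor
      · rintro ⟨rt, h1, h2⟩
        rw [← pvRootIs_unique h1 hRx, ← pvRootIs_unique h2 hrb]
      · intro h
        exact ⟨Rx, hRx, h ▸ hrb⟩
    have hconAY : Relation.EqvGen E a y ↔ rx = Ry := by
      rw [← hUF.conn a y ha0 ha1 hy0 hy1]
      constructor
      · rintro ⟨rt, h1, h2⟩
        rw [← pvRootIs_unique h1 hra, ← pvRootIs_unique h2 hRy]
      · intro h
        exact ⟨rx, hra, h ▸ hRy⟩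
    have hconBY : Relation.EqvGen E b y ↔ ry = Ry := by
      rw [← hUF.conn b y hb0 hb1 hy0 hy1]
      constructor
      · rintro ⟨rt, h1, h2⟩
        rw [← pvRootIs_unique h1 hrb, ← pvRootIs_unique h2 hRy]
      · intro h
        exact ⟨ry, hrb, h ▸ hRy⟩
    rw [hLHS, pvEqvGen_union E a b x y, hconXY, hconXA, hconXB, hconAY, hconBY]
    by_cases h1 : Rx = ry <;> by_cases h2 : Ry = ry <;>
      simp [h1, h2, hne, Ne.symm hne] <;> tauto

theorem pvUnion_spec {n : Int} {par : List Int} {E : Int → Int → Prop}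
    (hUF : pvUF n par E) (sz : List Int) {a b : Int}
    (ha0 : 0 ≤ a) (ha1 : a < (par.length : Int)) (hb0 : 0 ≤ b) (hb1 : b < (par.length : Int)) :
    pvUF n (pvB_union (par, sz) a b).1 (fun u v => E u v ∨ (u = a ∧ v = b)) := by
  have hfa := pvFind_root hUF ha0 ha1
  have hfb := pvFind_root hUF hb0 hb1
  by_cases heq : pvB_find par a = pvB_find par b
  · have hu : (pvB_union (par, sz) a b).1 = par := by
      simp [pvB_union, heq]
    rw [hu]
    -- a and b already connected: the new edge changes nothing
    have hab : Relation.EqvGen E a b :=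
      (hUF.conn a b ha0 ha1 hb0 hb1).mp ⟨pvB_find par b, heq ▸ hfa, hfb⟩
    refine ⟨hUF.len, hUF.inRange, hUF.acyc, ?_⟩
    intro x y hx0 hx1 hy0 hy1
    rw [hUF.conn x y hx0 hx1 hy0 hy1, pvEqvGen_union E a b x y]
    constructor
    · exact fun h => Or.inl h
    · rintro (h | ⟨h1, h2⟩ | ⟨h1, h2⟩)
      · exact h
      · exact Relation.EqvGen.trans _ _ _ h1 (Relation.EqvGen.trans _ _ _ hab h2)
      · exact Relation.EqvGen.trans _ _ _ h1
          (Relation.EqvGen.trans _ _ _ (Relation.EqvGen.symm _ _ hab) h2)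
  · by_cases hsz : PySem.List.pyGetD sz (pvB_find par a) 0 <
        PySem.List.pyGetD sz (pvB_find par b) 0
    · have hu : (pvB_union (par, sz) a b).1 =
          PySem.List.pySetD par (pvB_find par a) (pvB_find par b) := by
        simp [pvB_union, heq, hsz]
      rw [hu]
      exact pvUF_swapEdge (pvAttach hUF hb0 hb1 ha0 ha1 hfb hfa (Ne.symm heq))
    · have hu : (pvB_union (par, sz) a b).1 =
          PySem.List.pySetD par (pvB_find par b) (pvB_find par a) := by
        simp [pvB_union, heq, hsz]
      rw [hu]
      exact pvAttach hUF ha0 ha1 hb0 hb1 hfa hfb heq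

-- ===== the edges the union pass adds, and their meaning =====
def pvIdx (c : Int) (p : Int × Int) : Int := p.1 * c + p.2

def pvCellE (r c : Int) (g : List (List String)) (p : Int × Int) (a b : Int) : Prop :=
  pvA_cell g p.1 p.2 ≠ "#" ∧
    ((p.2 + 1 < c ∧ pvA_cell g p.1 (p.2 + 1) ≠ "#" ∧
        a = pvIdx c p ∧ b = pvIdx c p + 1) ∨
     (p.1 + 1 < r ∧ pvA_cell g (p.1 + 1) p.2 ≠ "#" ∧
        a = pvIdx c p ∧ b = pvIdx c p + c))

def pvEL (r c : Int) (g : List (List String)) (L : List (Int × Int)) (a b : Int) : Prop :=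
  ∃ p ∈ L, pvCellE r c g p a b

def pvIdxConn (r c : Int) (g : List (List String)) (k l : Int) : Prop :=
  ∃ p q : Int × Int, pvOk r c g p ∧ pvOk r c g q ∧ pvReach r c g p q ∧
    k = pvIdx c p ∧ l = pvIdx c q

theorem pvIdx_inj {c : Int} {p q : Int × Int}
    (hp0 : 0 ≤ p.2) (hp1 : p.2 < c) (hq0 : 0 ≤ q.2) (hq1 : q.2 < c)
    (h : pvIdx c p = pvIdx c q) : p = q := by
  obtain ⟨pi, pj⟩ := p
  obtain ⟨qi, qj⟩ := q
  simp only [pvIdx] at h hp0 hp1 hq0 hq1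
  have hc : 0 < c := by omega
  have hii : pi = qi := by
    rcases lt_trichotomy pi qi with h' | h' | h'
    · exfalso
      have h1 : (pi + 1) * c ≤ qi * c :=
        mul_le_mul_of_nonneg_right (by omega) (le_of_lt hc)
      nlinarith
    · exact h'
    · exfalso
      have h1 : (qi + 1) * c ≤ pi * c :=
        mul_le_mul_of_nonneg_right (by omega) (le_of_lt hc)
      nlinarith
  subst hii
  have : pj = qj := by omega
  simp [this]

theorem pvIdx_bounds {r c : Int} {p : Int × Int}
    (h1 : 0 ≤ p.1) (h2 : p.1 < r) (h3 : 0 ≤ p.2) (h4 : p.2 < c) :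
    0 ≤ pvIdx c p ∧ pvIdx c p < r * c := by
  obtain ⟨pi, pj⟩ := p
  simp only [pvIdx] at *
  have hc : 0 < c := by omega
  constructor
  · have := mul_nonneg h1 (le_of_lt hc)
    omega
  · have h5 : (pi + 1) * c ≤ r * c := mul_le_mul_of_nonneg_right (by omega) (le_of_lt hc)
    nlinarith

theorem pvEL_append_singleton {r c : Int} {g : List (List String)}
    {L : List (Int × Int)} {p : Int × Int} {a b : Int} :
    pvEL r c g (L ++ [p]) a b ↔ (pvEL r c g L a b ∨ pvCellE r c g p a b) := by
  unfold pvEL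
  constructor
  · rintro ⟨q, hq, hE⟩
    rcases List.mem_append.mp hq with h | h
    · exact Or.inl ⟨q, h, hE⟩
    · rw [List.mem_singleton] at h
      subst h
      exact Or.inr hE
  · rintro (⟨q, hq, hE⟩ | hE)
    · exact ⟨q, List.mem_append.mpr (Or.inl hq), hE⟩
    · exact ⟨p, List.mem_append.mpr (Or.inr (by simp)), hE⟩

theorem pvEqvGen_empty {α : Type} {E : α → α → Prop} (hE : ∀ u v, ¬ E u v) {x y : α}
    (h : Relation.EqvGen E x y) : x = y := by
  induction h with
  | rel u v huv => exact absurd huv (hE u v)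
  | refl u => rfl
  | symm u v _ ih => exact ih.symm
  | trans u v w _ _ ih1 ih2 => exact ih1.trans ih2

-- an edge recorded by the union pass joins two adjacent ok cells
theorem pvCellE_conn {r c : Int} {g : List (List String)} {p : Int × Int} {a b : Int}
    (h1 : 0 ≤ p.1) (h2 : p.1 < r) (h3 : 0 ≤ p.2) (h4 : p.2 < c)
    (hE : pvCellE r c g p a b) :
    ∃ q : Int × Int, pvOk r c g p ∧ pvOk r c g q ∧ pvAdj r c g p q ∧
      a = pvIdx c p ∧ b = pvIdx c q := by
  obtain ⟨hsharp, hor⟩ := hE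
  have hokp : pvOk r c g p := ⟨h1, h2, h3, h4, hsharp⟩
  rcases hor with ⟨hjc, hsharp2, ha, hb⟩ | ⟨hir, hsharp2, ha, hb⟩
  · refine ⟨(p.1, p.2 + 1), hokp, ⟨h1, h2, by omega, hjc, hsharp2⟩, ?_, ha, ?_⟩
    · exact ⟨⟨h1, h2, by omega, hjc, hsharp2⟩, (0, 1), by simp [pvA_move], by simp⟩
    · rw [hb]; simp [pvIdx]; ring
  · refine ⟨(p.1 + 1, p.2), hokp, ⟨by omega, hir, h3, h4, hsharp2⟩, ?_, ha, ?_⟩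
    · exact ⟨⟨by omega, hir, h3, h4, hsharp2⟩, (1, 0), by simp [pvA_move], by simp⟩
    · rw [hb]; simp [pvIdx]; ring

-- one adjacency step is realised by the recorded edges (possibly reversed)
theorem pvAdj_edge {r c : Int} {g : List (List String)} {u v : Int × Int}
    (hu : pvOk r c g u) (hadj : pvAdj r c g u v) :
    Relation.EqvGen (pvEL r c g (pvRasterL r c)) (pvIdx c u) (pvIdx c v) := by
  obtain ⟨hv, d, hd, hvd⟩ := hadj
  subst hvd
  obtain ⟨hu1, hu2, hu3, hu4, hu5⟩ := hu
  obtain ⟨hv1, hv2, hv3, hv4, hv5⟩ := hv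
  have hmemu : u ∈ pvRasterL r c := pvMem_rasterL.mpr ⟨hu1, hu2, hu3, hu4⟩
  simp only [pvA_move, List.mem_cons, List.not_mem_nil, or_false] at hd
  rcases hd with rfl | rfl | rfl | rfl
  · -- d = (-1, 0): (u.1 - 1, u.2); u is the down-neighbour of v
    have hmemv : (u.1 + -1, u.2 + 0) ∈ pvRasterL r c := pvMem_rasterL.mpr ⟨hv1, hv2, hv3, hv4⟩
    refine Relation.EqvGen.symm _ _ (Relation.EqvGen.rel _ _ ⟨(u.1 + -1, u.2 + 0), hmemv, hv5, Or.inr ⟨by omega, by simpa using hu5, rfl, ?_⟩⟩)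
    simp [pvIdx]; ring
  · -- d = (1, 0): down edge from u
    exact Relation.EqvGen.rel _ _ ⟨u, hmemu, hu5, Or.inr ⟨by omega, by simpa using hv5, rfl, by simp [pvIdx]; ring⟩⟩
  · -- d = (0, -1): u is the right-neighbour of v
    have hmemv : (u.1 + 0, u.2 + -1) ∈ pvRasterL r c := pvMem_rasterL.mpr ⟨hv1, hv2, hv3, hv4⟩
    refine Relation.EqvGen.symm _ _ (Relation.EqvGen.rel _ _ ⟨(u.1 + 0, u.2 + -1), hmemv, hv5, Or.inl ⟨by omega, by simpa using hu5, rfl, ?_⟩⟩)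
    simp [pvIdx]; ring
  · -- d = (0, 1): right edge from u
    exact Relation.EqvGen.rel _ _ ⟨u, hmemu, hu5, Or.inl ⟨by omega, by simpa using hv5, rfl, by simp [pvIdx]; ring⟩⟩

-- EqvGen of the full raster's edges is exactly window connectivity
theorem pvEqvGen_rasterE {r c : Int} {g : List (List String)} {k l : Int} :
    Relation.EqvGen (pvEL r c g (pvRasterL r c)) k l ↔ (k = l ∨ pvIdxConn r c g k l) := by
  constructor
  · intro h
    induction h with
    | rel a b hab =>
      obtain ⟨p, hp, hE⟩ := hab
      obtain ⟨h1, h2, h3, h4⟩ := pvMem_rasterL.mp hp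
      obtain ⟨q, hokp, hokq, hadj, ha, hb⟩ := pvCellE_conn h1 h2 h3 h4 hE
      exact Or.inr ⟨p, q, hokp, hokq, Relation.ReflTransGen.single hadj, ha, hb⟩
    | refl a => exact Or.inl rfl
    | symm a b _ ih =>
      rcases ih with rfl | ⟨p, q, h1, h2, h3, rfl, rfl⟩
      · exact Or.inl rfl
      · exact Or.inr ⟨q, p, h2, h1, pvReach_symm h1 h3, rfl, rfl⟩
    | trans a b c' _ _ ih1 ih2 =>
      rcases ih1 with rfl | ⟨p1, q1, ho1, ho2, hr1, rfl, rfl⟩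
      · exact ih2
      · rcases ih2 with heq | ⟨p2, q2, ko1, ko2, kr1, hk, rfl⟩
        · exact Or.inr ⟨p1, q1, ho1, ho2, hr1, rfl, heq.symm⟩
        · have hq1p2 : q1 = p2 :=
            pvIdx_inj ho2.2.2.1 ho2.2.2.2.1 ko1.2.2.1 ko1.2.2.2.1 hk
          subst hq1p2
          exact Or.inr ⟨p1, q2, ho1, ko2, hr1.trans kr1, rfl, rfl⟩
  · rintro (rfl | ⟨p, q, hokp, hokq, hre, rfl, rfl⟩)
    · exact Relation.EqvGen.refl _
    · clear hokq
      induction hre with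
      | refl => exact Relation.EqvGen.refl _
      | @tail u v hru hadj ih =>
        exact Relation.EqvGen.trans _ _ _ ih (pvAdj_edge (pvReach_ok hokp hru) hadj)

-- ===== the union pass establishes the invariant with the raster's edges =====
set_option maxHeartbeats 2000000 in
theorem pvUnionPass (r c : Int) (g : List (List String)) :
    pvUF (r * c)
      (((PySem.List.pyRange 0 r 1).foldl
        (fun st i => (PySem.List.pyRange 0 c 1).foldl
          (fun st j => pvB_unionCell r c g st i j) st)
        (PySem.List.pyRange 0 (r * c) 1, List.replicate (r * c).toNat 1)).1)
      (pvEL r c g (pvRasterL r c)) := by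
  have hlen0 : (PySem.List.pyRange 0 (r * c) 1).length = (r * c).toNat := by
    rw [PySem.List.length_pyRange_one]
    simp
  have hId : ∀ x : Int, 0 ≤ x → x < ((PySem.List.pyRange 0 (r * c) 1).length : Int) →
      pvPar (PySem.List.pyRange 0 (r * c) 1) x = x := by
    intro x h0 h1
    unfold pvPar
    rw [pvGetD_inrange _ _ _ h0 h1, PySem.List.getElem_pyRange_one]
    omega
  exact pvRasterFold r c (pvB_unionCell r c g)
    (fun L st => pvUF (r * c) st.1 (pvEL r c g L))
    (by
      intro L st i j hi0 hi1 hj0 hj1 hUF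
      have hnpos : 0 < r * c := mul_pos (by omega) (by omega)
      have hlen : (st.1.length : Int) = r * c := by
        rw [hUF.len]; omega
      have hbij := pvIdx_bounds (r := r) (c := c) (p := (i, j)) hi0 hi1 hj0 hj1
      simp only [pvIdx] at hbij
      by_cases hsharp : pvB_cell g i j = "#"
      · have hstep : pvB_unionCell r c g st i j = st := by
          unfold pvB_unionCell
          rw [if_pos hsharp]
        rw [hstep]
        refine pvUF_congr (fun u v => ?_) hUF
        rw [pvEL_append_singleton]
        constructor
        · exact fun h => Or.inl h
        · rintro (h | h)
          · exact h
          · exact absurd hsharp h.1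
      · have h1 : pvUF (r * c)
            (if j + 1 < c ∧ pvB_cell g i (j + 1) ≠ "#" then
              pvB_union st (i * c + j) (i * c + j + 1) else st).1
            (fun u v => pvEL r c g L u v ∨
              ((j + 1 < c ∧ pvB_cell g i (j + 1) ≠ "#") ∧ u = i * c + j ∧ v = i * c + j + 1)) := by
          by_cases hc1 : j + 1 < c ∧ pvB_cell g i (j + 1) ≠ "#"
          · rw [if_pos hc1]
            have hb2 := pvIdx_bounds (r := r) (c := c) (p := (i, j + 1)) hi0 hi1 (by omega) hc1.1
            simp only [pvIdx] at hb2
            have hspec := pvUnion_spec hUF st.2 (a := i * c + j) (b := i * c + j + 1)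
              (by omega) (by omega) (by omega) (by omega)
            refine pvUF_congr (fun u v => ?_) hspec
            constructor
            · rintro (h | ⟨rfl, rfl⟩)
              · exact Or.inl h
              · exact Or.inr ⟨hc1, rfl, rfl⟩
            · rintro (h | ⟨_, rfl, rfl⟩)
              · exact Or.inl h
              · exact Or.inr ⟨rfl, rfl⟩
          · rw [if_neg hc1]
            refine pvUF_congr (fun u v => ?_) hUF
            constructor
            · exact fun h => Or.inl h
            · rintro (h | ⟨hcc, _, _⟩)
              · exact h
              · exact absurd hcc hc1
        have hlen1 : ((if j + 1 < c ∧ pvB_cell g i (j + 1) ≠ "#" then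
            pvB_union st (i * c + j) (i * c + j + 1) else st).1.length : Int) = r * c := by
          rw [h1.len]; omega
        have h2 : pvUF (r * c)
            (pvB_unionCell r c g st i j).1
            (fun u v => (pvEL r c g L u v ∨
              ((j + 1 < c ∧ pvB_cell g i (j + 1) ≠ "#") ∧ u = i * c + j ∧ v = i * c + j + 1)) ∨
              ((i + 1 < r ∧ pvB_cell g (i + 1) j ≠ "#") ∧ u = i * c + j ∧ v = i * c + j + c)) := by
          have hstep : pvB_unionCell r c g st i j =
              (if i + 1 < r ∧ pvB_cell g (i + 1) j ≠ "#" then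
                pvB_union (if j + 1 < c ∧ pvB_cell g i (j + 1) ≠ "#" then
                  pvB_union st (i * c + j) (i * c + j + 1) else st)
                  (i * c + j) ((i + 1) * c + j)
               else (if j + 1 < c ∧ pvB_cell g i (j + 1) ≠ "#" then
                  pvB_union st (i * c + j) (i * c + j + 1) else st)) := by
            unfold pvB_unionCell
            rw [if_neg hsharp]
          rw [hstep]
          by_cases hc2 : i + 1 < r ∧ pvB_cell g (i + 1) j ≠ "#"
          · rw [if_pos hc2]
            have hb2 := pvIdx_bounds (r := r) (c := c) (p := (i + 1, j)) (by omega) hc2.1 hj0 hj1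
            simp only [pvIdx] at hb2
            have hidx : (i + 1) * c + j = i * c + j + c := by ring
            rw [hidx]
            have hspec := pvUnion_spec h1 (if j + 1 < c ∧ pvB_cell g i (j + 1) ≠ "#" then
                pvB_union st (i * c + j) (i * c + j + 1) else st).2
              (a := i * c + j) (b := i * c + j + c)
              (by omega) (by omega) (by omega) (by omega)
            refine pvUF_congr (fun u v => ?_) hspec
            constructor
            · rintro (h | ⟨rfl, rfl⟩)
              · exact Or.inl h
              · exact Or.inr ⟨hc2, rfl, rfl⟩
            · rintro (h | ⟨_, rfl, rfl⟩)
              · exact Or.inl h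
              · exact Or.inr ⟨rfl, rfl⟩
          · rw [if_neg hc2]
            refine pvUF_congr (fun u v => ?_) h1
            constructor
            · exact fun h => Or.inl h
            · rintro (h | ⟨hcc, _, _⟩)
              · exact h
              · exact absurd hcc hc2
        refine pvUF_congr (fun u v => ?_) h2
        rw [pvEL_append_singleton]
        have hcell : pvCellE r c g (i, j) u v ↔
            (((j + 1 < c ∧ pvB_cell g i (j + 1) ≠ "#") ∧ u = i * c + j ∧ v = i * c + j + 1) ∨
             ((i + 1 < r ∧ pvB_cell g (i + 1) j ≠ "#") ∧ u = i * c + j ∧ v = i * c + j + c)) := by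
          constructor
          · rintro ⟨_, ⟨ha1, ha2, ha3, ha4⟩ | ⟨ha1, ha2, ha3, ha4⟩⟩
            · exact Or.inl ⟨⟨ha1, ha2⟩, ha3, ha4⟩
            · exact Or.inr ⟨⟨ha1, ha2⟩, ha3, ha4⟩
          · rintro (⟨⟨ha1, ha2⟩, ha3, ha4⟩ | ⟨⟨ha1, ha2⟩, ha3, ha4⟩)
            · exact ⟨hsharp, Or.inl ⟨ha1, ha2, ha3, ha4⟩⟩
            · exact ⟨hsharp, Or.inr ⟨ha1, ha2, ha3, ha4⟩⟩
        rw [hcell]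
        tauto)
    (PySem.List.pyRange 0 (r * c) 1, List.replicate (r * c).toNat 1)
    (by
      refine ⟨by rw [hlen0], ?_, ⟨fun _ => 0, ?_⟩, ?_⟩
      · intro x h0 h1
        rw [hId x h0 h1]
        exact ⟨h0, h1⟩
      · intro x h0 h1 hne
        exact absurd (hId x h0 h1) hne
      · intro x y hx0 hx1 hy0 hy1
        have hEe : ∀ u v : Int, ¬ pvEL r c g [] u v := by
          rintro u v ⟨p, hp, _⟩
          simp at hp
        constructor
        · rintro ⟨rt, h1, h2⟩
          have hx : rt = x := pvReaches_root_det h1.1 (hId x hx0 hx1)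
          have hy : rt = y := pvReaches_root_det h2.1 (hId y hy0 hy1)
          rw [← hx, hy]
          exact Relation.EqvGen.refl _
        · intro h
          have hxy := pvEqvGen_empty hEe h
          subst hxy
          exact ⟨x, ⟨Relation.ReflTransGen.refl, hId x hx0 hx1⟩,
            ⟨Relation.ReflTransGen.refl, hId x hx0 hx1⟩⟩)

-- per-root tallies of the second pass
def pvCntO (g : List (List String)) (par : List Int) (c : Int)
    (L : List (Int × Int)) (k : Int) : Nat :=
  L.countP (fun p => decide (pvA_cell g p.1 p.2 = "o" ∧ pvB_find par (pvIdx c p) = k))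

def pvCntV (g : List (List String)) (par : List Int) (c : Int)
    (L : List (Int × Int)) (k : Int) : Nat :=
  L.countP (fun p => decide (pvA_cell g p.1 p.2 = "v" ∧ pvB_find par (pvIdx c p) = k))

theorem pvCount_card {L : List (Int × Int)} {B : Finset (Int × Int)}
    (hm : ∀ p, p ∈ L ↔ p ∈ B) (hnd : L.Nodup) (P : Int × Int → Prop) [DecidablePred P] :
    L.countP (fun p => decide (P p)) = (B.filter P).card := by
  rw [List.countP_eq_length_filter]
  rw [← List.toFinset_card_of_nodup (hnd.filter _)]
  congr 1
  ext q
  simp only [List.mem_toFinset, List.mem_filter, Finset.mem_filter, hm q, decide_eq_true_eq]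

theorem pvTallyPass {r c : Int} {g : List (List String)} {par : List Int}
    (hUF : pvUF (r * c) par (pvEL r c g (pvRasterL r c))) :
    (((PySem.List.pyRange 0 r 1).foldl
        (fun t i => (PySem.List.pyRange 0 c 1).foldl
          (fun t j => pvB_tallyCell c g par t i j) t)
        (List.replicate (r * c).toNat 0, List.replicate (r * c).toNat 0)).1.length
        = (r * c).toNat) ∧
    (((PySem.List.pyRange 0 r 1).foldl
        (fun t i => (PySem.List.pyRange 0 c 1).foldl
          (fun t j => pvB_tallyCell c g par t i j) t)
        (List.replicate (r * c).toNat 0, List.replicate (r * c).toNat 0)).2.length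
        = (r * c).toNat) ∧
    ∀ k : Int, 0 ≤ k → k < (((r * c).toNat : Nat) : Int) →
      pvPar (((PySem.List.pyRange 0 r 1).foldl
        (fun t i => (PySem.List.pyRange 0 c 1).foldl
          (fun t j => pvB_tallyCell c g par t i j) t)
        (List.replicate (r * c).toNat 0, List.replicate (r * c).toNat 0)).1) k
        = (pvCntO g par c (pvRasterL r c) k : Int) ∧
      pvPar (((PySem.List.pyRange 0 r 1).foldl
        (fun t i => (PySem.List.pyRange 0 c 1).foldl
          (fun t j => pvB_tallyCell c g par t i j) t)
        (List.replicate (r * c).toNat 0, List.replicate (r * c).toNat 0)).2) k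
        = (pvCntV g par c (pvRasterL r c) k : Int) := by
  exact pvRasterFold r c (pvB_tallyCell c g par)
    (fun L t => t.1.length = (r * c).toNat ∧ t.2.length = (r * c).toNat ∧
      ∀ k : Int, 0 ≤ k → k < (((r * c).toNat : Nat) : Int) →
        pvPar t.1 k = (pvCntO g par c L k : Int) ∧ pvPar t.2 k = (pvCntV g par c L k : Int))
    (by
      intro L t i j hi0 hi1 hj0 hj1 hInv
      obtain ⟨hl1, hl2, hk⟩ := hInv
      have hnpos : 0 < r * c := mul_pos (by omega) (by omega)
      have hbij := pvIdx_bounds (r := r) (c := c) (p := (i, j)) hi0 hi1 hj0 hj1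
      have hplenN : (par.length : Int) = (((r * c).toNat : Nat) : Int) := by rw [hUF.len]
      have hib0 : (0 : Int) ≤ pvIdx c (i, j) := hbij.1
      have hib1 : pvIdx c (i, j) < (par.length : Int) := by rw [hplenN]; omega
      have hroot := pvFind_root hUF hib0 hib1
      obtain ⟨hk00, hk01⟩ := pvReaches_range hUF hib0 hib1 hroot.1
      have hk01' : pvB_find par (pvIdx c (i, j)) < (((r * c).toNat : Nat) : Int) := by
        rw [← hplenN]; exact hk01
      have hidx : pvIdx c (i, j) = i * c + j := rfl
      have hCO : ∀ k : Int,
          (pvCntO g par c (L ++ [(i, j)]) k : Int) = (pvCntO g par c L k : Int) +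
            (if pvA_cell g i j = "o" ∧ pvB_find par (pvIdx c (i, j)) = k then 1 else 0) := by
        intro k
        unfold pvCntO
        rw [List.countP_append]
        simp only [List.countP_cons, List.countP_nil, Nat.zero_add, decide_eq_true_eq]
        split_ifs with h
        · push_cast; ring
        · push_cast; ring
      have hCV : ∀ k : Int,
          (pvCntV g par c (L ++ [(i, j)]) k : Int) = (pvCntV g par c L k : Int) +
            (if pvA_cell g i j = "v" ∧ pvB_find par (pvIdx c (i, j)) = k then 1 else 0) := by
        intro k
        unfold pvCntV
        rw [List.countP_append]
        simp only [List.countP_cons, List.countP_nil, Nat.zero_add, decide_eq_true_eq]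
        split_ifs with h
        · push_cast; ring
        · push_cast; ring
      by_cases hco : pvB_cell g i j = "o"
      · have hco' : pvA_cell g i j = "o" := hco
        have hstep : pvB_tallyCell c g par t i j =
            (PySem.List.pySetD t.1 (pvB_find par (i * c + j))
              (PySem.List.pyGetD t.1 (pvB_find par (i * c + j)) 0 + 1), t.2) := by
          unfold pvB_tallyCell
          rw [if_pos hco]
        rw [hstep]
        refine ⟨by rw [PySem.List.length_pySetD]; exact hl1, hl2, ?_⟩
        intro k hkk0 hkk1
        have hk1 : pvB_find par (pvIdx c (i, j)) < (t.1.length : Int) := by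
          rw [hl1]; exact hk01'
        constructor
        · show pvPar (PySem.List.pySetD t.1 (pvB_find par (i * c + j)) _) k = _
          rw [← hidx, pvPar_set hk00 hk1 hkk0, hCO k]
          by_cases hkk : k = pvB_find par (pvIdx c (i, j))
          · rw [if_pos hkk, if_pos ⟨hco', hkk.symm⟩, hkk]
            have hold := (hk (pvB_find par (pvIdx c (i, j))) hk00 hk01').1
            show pvPar t.1 _ + 1 = _
            rw [hold]
          · rw [if_neg hkk, if_neg (fun h => hkk h.2.symm)]
            rw [(hk k hkk0 hkk1).1]
            ring
        · rw [hCV k, if_neg (fun h => by rw [hco'] at h; exact absurd h.1 (by decide))]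
          rw [(hk k hkk0 hkk1).2]
          ring
      · by_cases hcv : pvB_cell g i j = "v"
        · have hcv' : pvA_cell g i j = "v" := hcv
          have hstep : pvB_tallyCell c g par t i j =
              (t.1, PySem.List.pySetD t.2 (pvB_find par (i * c + j))
                (PySem.List.pyGetD t.2 (pvB_find par (i * c + j)) 0 + 1)) := by
            unfold pvB_tallyCell
            rw [if_neg hco, if_pos hcv]
          rw [hstep]
          refine ⟨hl1, by rw [PySem.List.length_pySetD]; exact hl2, ?_⟩
          intro k hkk0 hkk1
          have hk1 : pvB_find par (pvIdx c (i, j)) < (t.2.length : Int) := by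
            rw [hl2]; exact hk01'
          constructor
          · rw [hCO k, if_neg (fun h => by rw [hcv'] at h; exact absurd h.1 (by decide))]
            rw [(hk k hkk0 hkk1).1]
            ring
          · show pvPar (PySem.List.pySetD t.2 (pvB_find par (i * c + j)) _) k = _
            rw [← hidx, pvPar_set hk00 hk1 hkk0, hCV k]
            by_cases hkk : k = pvB_find par (pvIdx c (i, j))
            · rw [if_pos hkk, if_pos ⟨hcv', hkk.symm⟩, hkk]
              have hold := (hk (pvB_find par (pvIdx c (i, j))) hk00 hk01').2
              show pvPar t.2 _ + 1 = _
              rw [hold]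
            · rw [if_neg hkk, if_neg (fun h => hkk h.2.symm)]
              rw [(hk k hkk0 hkk1).2]
              ring
        · have hco' : pvA_cell g i j ≠ "o" := hco
          have hcv' : pvA_cell g i j ≠ "v" := hcv
          have hstep : pvB_tallyCell c g par t i j = t := by
            unfold pvB_tallyCell
            rw [if_neg hco, if_neg hcv]
          rw [hstep]
          refine ⟨hl1, hl2, ?_⟩
          intro k hkk0 hkk1
          constructor
          · rw [hCO k, if_neg (fun h => hco' h.1), (hk k hkk0 hkk1).1]
            ring
          · rw [hCV k, if_neg (fun h => hcv' h.1), (hk k hkk0 hkk1).2]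
            ring)
    (List.replicate (r * c).toNat 0, List.replicate (r * c).toNat 0)
    (by
      refine ⟨by simp, by simp, ?_⟩
      intro k h0 h1
      have hz : pvPar (List.replicate (r * c).toNat (0 : Int)) k = 0 := by
        unfold pvPar
        rw [pvGetD_inrange _ _ _ h0 (by simpa using h1)]
        simp
      rw [hz]
      simp [pvCntO, pvCntV])

-- the value the last pass subtracts at index k
def pvF (par oA vA : List Int) (k : Int) : Int × Int :=
  if pvB_find par k = k then
    (if PySem.List.pyGetD oA k 0 ≤ PySem.List.pyGetD vA k 0 then (PySem.List.pyGetD oA k 0, 0)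
     else (0, PySem.List.pyGetD vA k 0))
  else (0, 0)

theorem pvRootFold (par oA vA : List Int) :
    ∀ (ks : List Int) (sw : Int × Int),
      ks.foldl (pvB_rootStep par oA vA) sw =
        (sw.1 - ((ks.map (pvF par oA vA)).sum).1, sw.2 - ((ks.map (pvF par oA vA)).sum).2) := by
  intro ks
  induction ks with
  | nil => intro sw; simp
  | cons k ks ih =>
    intro sw
    rw [List.foldl_cons, ih]
    simp only [List.map_cons, List.sum_cons, Prod.fst_add, Prod.snd_add]
    unfold pvB_rootStep pvF
    by_cases h1 : pvB_find par k = k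
    · rw [if_pos h1, if_pos h1]
      by_cases h2 : PySem.List.pyGetD oA k 0 ≤ PySem.List.pyGetD vA k 0
      · rw [if_pos h2, if_pos h2]
        refine Prod.ext ?_ ?_ <;> dsimp <;> ring
      · rw [if_neg h2, if_neg h2]
        refine Prod.ext ?_ ?_ <;> dsimp <;> ring
    · rw [if_neg h1, if_neg h1]
      refine Prod.ext ?_ ?_ <;> dsimp <;> ring

noncomputable def pvRep (r c : Int) (g : List (List String)) (par : List Int) (k : Int) :
    Int × Int :=
  @dite _ (∃ p : Int × Int, pvOk r c g p ∧ pvB_find par (pvIdx c p) = k)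
    (Classical.propDecidable _) (fun h => Classical.choose h) (fun _ => (0, 0))

noncomputable def pvPick (r c : Int) (g : List (List String)) (C : Finset (Int × Int)) :
    Int × Int :=
  @dite _ (∃ p : Int × Int, pvOk r c g p ∧ pvCls r c g p = C)
    (Classical.propDecidable _) (fun h => Classical.choose h) (fun _ => (0, 0))

theorem pvRep_spec {r c : Int} {g : List (List String)} {par : List Int} {k : Int}
    (h : ∃ p : Int × Int, pvOk r c g p ∧ pvB_find par (pvIdx c p) = k) :
    pvOk r c g (pvRep r c g par k) ∧ pvB_find par (pvIdx c (pvRep r c g par k)) = k := by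
  unfold pvRep
  rw [dif_pos h]
  exact Classical.choose_spec h

theorem pvPick_spec {r c : Int} {g : List (List String)} {C : Finset (Int × Int)}
    (h : ∃ p : Int × Int, pvOk r c g p ∧ pvCls r c g p = C) :
    pvOk r c g (pvPick r c g C) ∧ pvCls r c g (pvPick r c g C) = C := by
  unfold pvPick
  rw [dif_pos h]
  exact Classical.choose_spec h

-- two ok cells share a root exactly when they are connected
theorem pvSameRoot {r c : Int} {g : List (List String)} {par : List Int}
    (hUF : pvUF (r * c) par (pvEL r c g (pvRasterL r c)))
    {p q : Int × Int} (hp : pvOk r c g p) (hq : pvOk r c g q) :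
    pvB_find par (pvIdx c p) = pvB_find par (pvIdx c q) ↔ pvReach r c g p q := by
  have hplen : (par.length : Int) = (((r * c).toNat : Nat) : Int) := by rw [hUF.len]
  have hbp := pvIdx_bounds hp.1 hp.2.1 hp.2.2.1 hp.2.2.2.1
  have hbq := pvIdx_bounds hq.1 hq.2.1 hq.2.2.1 hq.2.2.2.1
  have hp1 : pvIdx c p < (par.length : Int) := by rw [hplen]; omega
  have hq1 : pvIdx c q < (par.length : Int) := by rw [hplen]; omega
  have hfp := pvFind_root hUF hbp.1 hp1
  have hfq := pvFind_root hUF hbq.1 hq1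
  constructor
  · intro heq
    have hconn := (hUF.conn _ _ hbp.1 hp1 hbq.1 hq1).mp
      ⟨pvB_find par (pvIdx c p), hfp, by rw [heq]; exact hfq⟩
    rcases pvEqvGen_rasterE.mp hconn with heqi | ⟨p', q', ho1, ho2, hr, hip, hiq⟩
    · have : p = q := pvIdx_inj hp.2.2.1 hp.2.2.2.1 hq.2.2.1 hq.2.2.2.1 heqi
      rw [this]
      exact Relation.ReflTransGen.refl
    · have hpp : p = p' := pvIdx_inj hp.2.2.1 hp.2.2.2.1 ho1.2.2.1 ho1.2.2.2.1 hip
      have hqq : q = q' := pvIdx_inj hq.2.2.1 hq.2.2.2.1 ho2.2.2.1 ho2.2.2.2.1 hiq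
      rw [hpp, hqq]
      exact hr
  · intro hre
    have hconn : Relation.EqvGen (pvEL r c g (pvRasterL r c)) (pvIdx c p) (pvIdx c q) :=
      pvEqvGen_rasterE.mpr (Or.inr ⟨p, q, hp, hq, hre, rfl, rfl⟩)
    obtain ⟨rt, h1, h2⟩ := (hUF.conn _ _ hbp.1 hp1 hbq.1 hq1).mpr hconn
    rw [pvFind_eq_root hUF hbp.1 hp1 h1, pvFind_eq_root hUF hbq.1 hq1 h2]

set_option maxHeartbeats 1000000 in
theorem pvRootSum {r c : Int} {g : List (List String)} {par oA vA : List Int}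
    (hUF : pvUF (r * c) par (pvEL r c g (pvRasterL r c)))
    (hO : ∀ k : Int, 0 ≤ k → k < (((r * c).toNat : Nat) : Int) →
      PySem.List.pyGetD oA k 0 = (pvCntO g par c (pvRasterL r c) k : Int))
    (hV : ∀ k : Int, 0 ≤ k → k < (((r * c).toNat : Nat) : Int) →
      PySem.List.pyGetD vA k 0 = (pvCntV g par c (pvRasterL r c) k : Int)) :
    ((PySem.List.pyRange 0 (r * c) 1).map (pvF par oA vA)).sum = pvCanon r c g := by
  have hplen : (par.length : Int) = (((r * c).toNat : Nat) : Int) := by rw [hUF.len]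
  have hnle : r * c ≤ (((r * c).toNat : Nat) : Int) := Int.self_le_toNat _
  have hm : ∀ p : Int × Int, p ∈ pvRasterL r c ↔ p ∈ pvBox r c := by
    intro p
    rw [pvMem_rasterL]
    simp [pvBox, Finset.mem_Ico, and_assoc]
  have hcardO : ∀ k : Int, (pvCntO g par c (pvRasterL r c) k : Int) =
      (((pvBox r c).filter
        (fun q => pvA_cell g q.1 q.2 = "o" ∧ pvB_find par (pvIdx c q) = k)).card : Int) := by
    intro k
    unfold pvCntO
    exact_mod_cast congrArg Nat.cast
      (pvCount_card hm (pvNodup_rasterL r c)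
        (fun q => pvA_cell g q.1 q.2 = "o" ∧ pvB_find par (pvIdx c q) = k))
  have hcardV : ∀ k : Int, (pvCntV g par c (pvRasterL r c) k : Int) =
      (((pvBox r c).filter
        (fun q => pvA_cell g q.1 q.2 = "v" ∧ pvB_find par (pvIdx c q) = k)).card : Int) := by
    intro k
    unfold pvCntV
    exact_mod_cast congrArg Nat.cast
      (pvCount_card hm (pvNodup_rasterL r c)
        (fun q => pvA_cell g q.1 q.2 = "v" ∧ pvB_find par (pvIdx c q) = k))
  have hok_of : ∀ q : Int × Int, q ∈ pvBox r c → pvA_cell g q.1 q.2 ≠ "#" → pvOk r c g q := by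
    intro q hqb hqs
    have : 0 ≤ q.1 ∧ q.1 < r ∧ 0 ≤ q.2 ∧ q.2 < c := by
      simpa [pvBox, Finset.mem_Ico, and_assoc] using hqb
    exact ⟨this.1, this.2.1, this.2.2.1, this.2.2.2, hqs⟩
  have hfin : ((PySem.List.pyRange 0 (r * c) 1).map (pvF par oA vA)).sum =
      ∑ k ∈ Finset.Ico (0 : Int) (r * c), pvF par oA vA k := by
    rw [← List.sum_toFinset _ (PySem.List.nodup_pyRange_one 0 (r * c))]
    congr 1
    ext k
    simp [PySem.List.mem_pyRange_one, Finset.mem_Ico]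
  rw [hfin]
  have hsub : pvFilterP (fun k => ∃ p : Int × Int, pvOk r c g p ∧ pvB_find par (pvIdx c p) = k)
      (Finset.Ico (0 : Int) (r * c)) ⊆ Finset.Ico (0 : Int) (r * c) :=
    fun k hk => (pvMem_filterP.mp hk).1
  have hzero : ∀ k ∈ Finset.Ico (0 : Int) (r * c),
      k ∉ pvFilterP (fun k => ∃ p : Int × Int, pvOk r c g p ∧ pvB_find par (pvIdx c p) = k)
        (Finset.Ico (0 : Int) (r * c)) → pvF par oA vA k = 0 := by
    intro k hk hnk
    have hnex : ¬ ∃ p : Int × Int, pvOk r c g p ∧ pvB_find par (pvIdx c p) = k := by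
      intro hex
      exact hnk (pvMem_filterP.mpr ⟨hk, hex⟩)
    rw [Finset.mem_Ico] at hk
    unfold pvF
    by_cases hfk : pvB_find par k = k
    · rw [if_pos hfk]
      have hoz : ((pvBox r c).filter
          (fun q => pvA_cell g q.1 q.2 = "o" ∧ pvB_find par (pvIdx c q) = k)) = ∅ := by
        apply Finset.filter_eq_empty_iff.mpr
        rintro q hq ⟨hcell, hfind⟩
        exact hnex ⟨q, hok_of q hq (by rw [hcell]; decide), hfind⟩
      have hvz : ((pvBox r c).filter
          (fun q => pvA_cell g q.1 q.2 = "v" ∧ pvB_find par (pvIdx c q) = k)) = ∅ := by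
        apply Finset.filter_eq_empty_iff.mpr
        rintro q hq ⟨hcell, hfind⟩
        exact hnex ⟨q, hok_of q hq (by rw [hcell]; decide), hfind⟩
      rw [hO k hk.1 (by omega), hV k hk.1 (by omega), hcardO, hcardV, hoz, hvz]
      simp
    · rw [if_neg hfk]
      rfl
  rw [← Finset.sum_subset hsub hzero]
  unfold pvCanon
  refine Finset.sum_nbij' (i := fun k => pvCls r c g (pvRep r c g par k))
    (j := fun C => pvB_find par (pvIdx c (pvPick r c g C))) ?_ ?_ ?_ ?_ ?_
  · intro k hk
    dsimp only
    obtain ⟨hk1, hex⟩ := pvMem_filterP.mp hk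
    obtain ⟨hok, _⟩ := pvRep_spec hex
    exact Finset.mem_image.mpr ⟨pvRep r c g par k,
      pvMem_filterP.mpr ⟨pvMem_box_of_ok hok, hok⟩, rfl⟩
  · intro C hC
    dsimp only
    obtain ⟨p0, hp0, hcls⟩ := Finset.mem_image.mp hC
    have hok0 : pvOk r c g p0 := (pvMem_filterP.mp hp0).2
    obtain ⟨hokp, hclsp⟩ := pvPick_spec ⟨p0, hok0, hcls⟩
    have hb := pvIdx_bounds hokp.1 hokp.2.1 hokp.2.2.1 hokp.2.2.2.1
    have hi1 : pvIdx c (pvPick r c g C) < (par.length : Int) := by rw [hplen]; omega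
    have hroot := pvFind_root hUF hb.1 hi1
    obtain ⟨hr0, hr1⟩ := pvReaches_range hUF hb.1 hi1 hroot.1
    have hnpos : 0 < r * c := by
      have := hokp.1
      have := hokp.2.1
      have := hokp.2.2.1
      have := hokp.2.2.2.1
      exact mul_pos (by omega) (by omega)
    refine pvMem_filterP.mpr ⟨Finset.mem_Ico.mpr ⟨hr0, by omega⟩, ⟨pvPick r c g C, hokp, rfl⟩⟩
  · intro k hk
    dsimp only
    obtain ⟨hk1, hex⟩ := pvMem_filterP.mp hk
    obtain ⟨hokr, hfr⟩ := pvRep_spec hex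
    obtain ⟨hokp, hclsp⟩ := pvPick_spec ⟨pvRep r c g par k, hokr, rfl⟩
    have hself := (pvMem_cls (r := r) (c := c) (g := g) hokp).mpr Relation.ReflTransGen.refl
    rw [hclsp] at hself
    have hre : pvReach r c g (pvRep r c g par k)
        (pvPick r c g (pvCls r c g (pvRep r c g par k))) := (pvMem_cls hokr).mp hself
    rw [← ((pvSameRoot hUF hokr hokp).mpr hre), hfr]
  · intro C hC
    dsimp only
    obtain ⟨p0, hp0, hcls⟩ := Finset.mem_image.mp hC
    have hok0 : pvOk r c g p0 := (pvMem_filterP.mp hp0).2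
    obtain ⟨hokp, hclsp⟩ := pvPick_spec ⟨p0, hok0, hcls⟩
    obtain ⟨hokr, hfr⟩ := pvRep_spec ⟨pvPick r c g C, hokp, rfl⟩
    have hre : pvReach r c g
        (pvRep r c g par (pvB_find par (pvIdx c (pvPick r c g C)))) (pvPick r c g C) :=
      (pvSameRoot hUF hokr hokp).mp hfr
    rw [← pvCls_eq_of_reach hokr hre]
    exact hclsp
  · intro k hk
    dsimp only
    obtain ⟨hk1, hex⟩ := pvMem_filterP.mp hk
    obtain ⟨hokr, hfr⟩ := pvRep_spec hex
    rw [Finset.mem_Ico] at hk1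
    have hk1' : k < (par.length : Int) := by rw [hplen]; omega
    have hbr := pvIdx_bounds hokr.1 hokr.2.1 hokr.2.2.1 hokr.2.2.2.1
    have hir1 : pvIdx c (pvRep r c g par k) < (par.length : Int) := by rw [hplen]; omega
    have hroot : pvIsRoot par k := by
      have := pvFind_root hUF hbr.1 hir1
      rw [hfr] at this
      exact this.2
    have hfk : pvB_find par k = k :=
      pvFind_eq_root hUF hk1.1 hk1' ⟨Relation.ReflTransGen.refl, hroot⟩
    have hsetO : (pvBox r c).filter
        (fun q => pvA_cell g q.1 q.2 = "o" ∧ pvB_find par (pvIdx c q) = k) =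
        (pvCls r c g (pvRep r c g par k)).filter (fun q => pvA_cell g q.1 q.2 = "o") := by
      ext q
      rw [Finset.mem_filter, Finset.mem_filter, pvMem_cls hokr]
      constructor
      · rintro ⟨hqb, hcell, hfind⟩
        have hokq : pvOk r c g q := hok_of q hqb (by rw [hcell]; decide)
        exact ⟨(pvSameRoot hUF hokr hokq).mp (hfr.trans hfind.symm), hcell⟩
      · rintro ⟨hre, hcell⟩
        have hokq : pvOk r c g q := pvReach_ok hokr hre
        refine ⟨pvMem_box_of_ok hokq, hcell, ?_⟩
        rw [← ((pvSameRoot hUF hokr hokq).mpr hre), hfr]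
    have hsetV : (pvBox r c).filter
        (fun q => pvA_cell g q.1 q.2 = "v" ∧ pvB_find par (pvIdx c q) = k) =
        (pvCls r c g (pvRep r c g par k)).filter (fun q => pvA_cell g q.1 q.2 = "v") := by
      ext q
      rw [Finset.mem_filter, Finset.mem_filter, pvMem_cls hokr]
      constructor
      · rintro ⟨hqb, hcell, hfind⟩
        have hokq : pvOk r c g q := hok_of q hqb (by rw [hcell]; decide)
        exact ⟨(pvSameRoot hUF hokr hokq).mp (hfr.trans hfind.symm), hcell⟩
      · rintro ⟨hre, hcell⟩
        have hokq : pvOk r c g q := pvReach_ok hokr hre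
        refine ⟨pvMem_box_of_ok hokq, hcell, ?_⟩
        rw [← ((pvSameRoot hUF hokr hokq).mpr hre), hfr]
    unfold pvF pvTerm pvOCnt pvVCnt
    rw [if_pos hfk, hO k hk1.1 (by omega), hV k hk1.1 (by omega), hcardO, hcardV, hsetO, hsetV]

-- ===== B equals the canonical value =====
theorem pvB_canon (r c : Int) (g : List (List String)) :
    solution_alt r c g = (pvTotO g - (pvCanon r c g).1, pvTotV g - (pvCanon r c g).2) := by
  by_cases hdeg : r ≤ 0 ∨ c ≤ 0
  · have hbox : pvBox r c = ∅ := by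
      unfold pvBox
      rcases hdeg with h | h
      · rw [Finset.Ico_eq_empty (by omega), Finset.empty_product]
      · rw [Finset.Ico_eq_empty (a := (0:Int)) (b := c) (by omega), Finset.product_empty]
    have hcanon : pvCanon r c g = 0 := by
      unfold pvCanon pvCompsAll pvOkCells
      rw [hbox]
      simp [pvFilterP]
    have hsol : solution_alt r c g = (pvTotO g, pvTotV g) := by
      unfold solution_alt
      rw [if_pos hdeg]
      rfl
    rw [hsol, hcanon]
    simp
  have hUF := pvUnionPass r c g
  obtain ⟨hl1, hl2, hk⟩ := pvTallyPass (r := r) (c := c) (g := g) hUF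
  have hsol : solution_alt r c g =
      (PySem.List.pyRange 0 (r * c) 1).foldl
        (pvB_rootStep
          (((PySem.List.pyRange 0 r 1).foldl
            (fun st i => (PySem.List.pyRange 0 c 1).foldl
              (fun st j => pvB_unionCell r c g st i j) st)
            (PySem.List.pyRange 0 (r * c) 1, List.replicate (r * c).toNat 1)).1)
          (((PySem.List.pyRange 0 r 1).foldl
            (fun t i => (PySem.List.pyRange 0 c 1).foldl
              (fun t j => pvB_tallyCell c g
                (((PySem.List.pyRange 0 r 1).foldl
                  (fun st i => (PySem.List.pyRange 0 c 1).foldl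
                    (fun st j => pvB_unionCell r c g st i j) st)
                  (PySem.List.pyRange 0 (r * c) 1, List.replicate (r * c).toNat 1)).1)
                t i j) t)
            (List.replicate (r * c).toNat 0, List.replicate (r * c).toNat 0)).1)
          (((PySem.List.pyRange 0 r 1).foldl
            (fun t i => (PySem.List.pyRange 0 c 1).foldl
              (fun t j => pvB_tallyCell c g
                (((PySem.List.pyRange 0 r 1).foldl
                  (fun st i => (PySem.List.pyRange 0 c 1).foldl
                    (fun st j => pvB_unionCell r c g st i j) st)
                  (PySem.List.pyRange 0 (r * c) 1, List.replicate (r * c).toNat 1)).1)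
                t i j) t)
            (List.replicate (r * c).toNat 0, List.replicate (r * c).toNat 0)).2))
        (pvTotO g, pvTotV g) := by
    unfold solution_alt
    rw [if_neg hdeg]
    rfl
  rw [hsol, pvRootFold, pvRootSum hUF (fun k h0 h1 => (hk k h0 h1).1) (fun k h0 h1 => (hk k h0 h1).2)]

-- ===== VERDICT (by name: the statement is the Claim_ definition above) =====
theorem solution_spec : Claim_equal_solution := by
  intro r c g _ _
  unfold Spec_solution
  rw [pvA_canon, pvB_canon]
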